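-- pv_equiv track=rewrite | github.com/Arpreet2107/DSA-in-Python | 10_Dynamic_Programming/Learning_Problems/subtree_sum.py | subtree_sum
-- ===== SOURCE A (Python) =====
-- from collections import defaultdict
--
-- def subtree_sum(n, edges, values):
--     """
--     Post-order DP on tree.
--     Compute sum of values in subtree of each node.
--     """
--
--     graph = defaultdict(list)
--     for u, v in edges:
--         graph[u].append(v)
--         graph[v].append(u)
--
--     res = [0] * (n + 1)
--
--     def dfs(node, parent):
--         total = values[node]
--         for nei in graph[node]:
--             if nei != parent:
--                 total += dfs(nei, node)
--         res[node] = total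
--         return total
--
--     dfs(1, -1)   # assuming 1 is root
--     return res
-- ===== SOURCE B (Python) =====
-- from collections import defaultdict
--
-- def subtree_sum(n, edges, values):
--     """
--     Iterative two-phase version: discover nodes from root 1 with an explicit
--     stack while recording each node's parent and discovery order, then sweep
--     the order backwards accumulating child sums into parents.
--     """
--     graph = defaultdict(list)
--     for u, v in edges:
--         graph[u].append(v)
--         graph[v].append(u)
--
--     parent = [0] * (n + 1)
--     parent[1] = -1
--     order = []
--     stack = [1]
--     while stack:
--         v = stack.pop()
--         order.append(v)
--         for nei in graph[v]:
--             if nei != parent[v]: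
--                 parent[nei] = v
--                 stack.append(nei)
--
--     res = [0] * (n + 1)
--     for v in reversed(order):
--         res[v] += values[v]
--         if parent[v] != -1:
--             res[parent[v]] += res[v]
--     return res
-- ===== Notes on version B (the rewrite author's own statement) =====
-- stated objective: alternative
-- what changed: Replaces the recursive post-order DFS that mutates res inside the recursion by an iterative two-phase algorithm: an explicit-stack traversal records each node's parent and discovery order, then a single backward sweep over that order accumulates each node's sum into its parent's slot.
-- outside the precondition, e.g. on subtree_sum(1, [(1, 1)], [0, 7]): A returns [0, 21], B returns [0, 42]; on subtree_sum(2, [(1, 2), (1, 2)], [0, 1, 2]): A returns [0, 5, 2], B returns [0, 7, 4]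
import Mathlib
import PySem

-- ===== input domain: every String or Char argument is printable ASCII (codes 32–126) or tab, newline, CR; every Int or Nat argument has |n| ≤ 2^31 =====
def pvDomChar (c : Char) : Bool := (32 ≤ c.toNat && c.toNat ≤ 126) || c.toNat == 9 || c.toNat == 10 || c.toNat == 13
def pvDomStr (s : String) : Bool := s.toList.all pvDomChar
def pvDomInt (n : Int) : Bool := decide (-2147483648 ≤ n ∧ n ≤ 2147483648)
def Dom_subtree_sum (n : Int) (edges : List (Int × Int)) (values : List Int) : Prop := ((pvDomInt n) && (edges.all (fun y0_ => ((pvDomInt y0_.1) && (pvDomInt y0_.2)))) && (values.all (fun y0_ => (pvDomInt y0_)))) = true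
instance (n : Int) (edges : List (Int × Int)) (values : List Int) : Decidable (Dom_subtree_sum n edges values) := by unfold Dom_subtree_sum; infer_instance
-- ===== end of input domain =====

-- B replaces A's recursive post-order DFS by an iterative two-phase traversal (stack discovery
-- order + backward accumulation); equivalence is proved on inputs whose component of the root 1
-- is a tree with node labels in range (A additionally raises RecursionError on very deep trees).

-- ===== PORT A =====
-- graph = defaultdict(list); for u, v in edges: graph[u].append(v); graph[v].append(u)
def pvBuildGraph (edges : List (Int × Int)) : PySem.Dict Int (List Int) :=
  edges.foldl (fun g e => (g.modify e.1 [] (· ++ [e.2])).modify e.2 [] (· ++ [e.1]))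
    PySem.Dict.empty

-- def dfs(node, parent): … (fuel only makes the recursion total; none = the Python raises)
def pvDfsA (g : PySem.Dict Int (List Int)) (values : List Int) :
    Nat → Int → Int → List Int → Option (Int × List Int)
  | 0, _, _, _ => none
  | fuel+1, node, parent, res =>
      (PySem.List.pyGet? values node).bind fun v0 =>          -- total = values[node]
      ((g.getD node []).foldlM (fun (st : Int × List Int) nei =>   -- for nei in graph[node]:
          if nei ≠ parent then
            (pvDfsA g values fuel nei node st.2).bind fun r => some (st.1 + r.1, r.2)
          else some st) (v0, res)).bind fun st =>
      (PySem.List.pySet? st.2 node st.1).bind fun res' =>     -- res[node] = total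
      some (st.1, res')

def subtree_sum (n : Int) (edges : List (Int × Int)) (values : List Int) : List Int :=
  let g := pvBuildGraph edges
  let res := List.replicate (n + 1).toNat (0 : Int)          -- res = [0] * (n + 1)
  match pvDfsA g values (2 * edges.length + 3) 1 (-1) res with   -- dfs(1, -1)
  | some st => st.2
  | none => []

-- ===== PORT B =====
-- while stack: v = stack.pop(); order.append(v); for nei in graph[v]: if nei != parent[v]: …
def pvLoopB (g : PySem.Dict Int (List Int)) :
    Nat → List Int → List Int → List Int → Option (List Int × List Int)
  | fuel, stack, order, parent =>
      match stack with
      | [] => some (order, parent)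
      | _ :: _ =>
        match fuel with
        | 0 => none
        | fuel+1 =>
            (PySem.List.pop? stack).bind fun vs =>           -- v = stack.pop()
            ((g.getD vs.1 []).foldlM (fun (st : List Int × List Int) nei =>
                (PySem.List.pyGet? st.2 vs.1).bind fun pv =>  -- parent[v]
                if nei ≠ pv then
                  (PySem.List.pySet? st.2 nei vs.1).bind fun par' =>  -- parent[nei] = v
                  some (st.1 ++ [nei], par')                  -- stack.append(nei)
                else some st) (vs.2, parent)).bind fun st =>
            pvLoopB g fuel st.1 (order ++ [vs.1]) st.2        -- order.append(v)

-- for v in reversed(order): res[v] += values[v]; if parent[v] != -1: res[parent[v]] += res[v]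
def pvPhase2 (values parent : List Int) (order : List Int) (res0 : List Int) : Option (List Int) :=
  order.reverse.foldlM (fun res v =>
    (PySem.List.pyGet? res v).bind fun cur =>
    (PySem.List.pyGet? values v).bind fun vv =>
    (PySem.List.pySet? res v (cur + vv)).bind fun res1 =>
    (PySem.List.pyGet? res1 v).bind fun sv =>
    (PySem.List.pyGet? parent v).bind fun pv =>
    if pv ≠ -1 then
      (PySem.List.pyGet? res1 pv).bind fun cp =>
      PySem.List.pySet? res1 pv (cp + sv)
    else some res1) res0

def subtree_sum_alt (n : Int) (edges : List (Int × Int)) (values : List Int) : List Int :=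
  let g := pvBuildGraph edges
  match (PySem.List.pySet? (List.replicate (n + 1).toNat (0 : Int)) 1 (-1)).bind fun parent0 =>
        (pvLoopB g (2 * edges.length + 2) [1] [] parent0).bind fun op =>
        pvPhase2 values op.2 op.1 (List.replicate (n + 1).toNat (0 : Int)) with
  | some res => res
  | none => []

-- ===== PRECONDITION & SPEC =====
-- one synchronous closure step: add both endpoints of every edge touching s
def pvStep (edges : List (Int × Int)) (s : Finset Int) : Finset Int :=
  edges.foldl (fun t e => if e.1 ∈ s ∨ e.2 ∈ s then insert e.1 (insert e.2 t) else t) s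

-- the connected component of the root 1 (enough iterations to reach the fixpoint)
def pvReach (edges : List (Int × Int)) : Finset Int :=
  (pvStep edges)^[2 * edges.length + 2] {1}

def pvNorm (e : Int × Int) : Int × Int := if e.1 ≤ e.2 then e else (e.2, e.1)

def pvEdgesC (edges : List (Int × Int)) : List (Int × Int) :=
  edges.filter (fun e => decide (e.1 ∈ pvReach edges ∨ e.2 ∈ pvReach edges))

-- Pre_: the component of node 1 is a tree (no self-loops, no repeated unordered edge,
-- |edges| = |vertices| - 1) whose vertices are valid indices into res and values.
-- Pre_ excludes inputs on which A still returns a value whose shape is an accident of the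
-- implementation: components with a self-loop or a duplicated unordered edge (double-counted
-- sums from revisits) and components containing a negative node label (Python negative-index
-- wraparound); see the cited examples.
def Pre_subtree_sum (n : Int) (edges : List (Int × Int)) (values : List Int) : Prop :=
  (∀ c ∈ pvReach edges, 0 ≤ c ∧ c ≤ n ∧ (c : Int) < (values.length : Int)) ∧
  (∀ e ∈ pvEdgesC edges, e.1 ≠ e.2) ∧
  ((pvEdgesC edges).map pvNorm).Nodup ∧
  (pvEdgesC edges).length + 1 = (pvReach edges).card

instance (n : Int) (edges : List (Int × Int)) (values : List Int) :
    Decidable (Pre_subtree_sum n edges values) := by unfold Pre_subtree_sum; infer_instance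

def pvWitness_subtree_sum : Int × (List (Int × Int)) × List Int :=
  (5, [(1, 2), (1, 3), (2, 4), (2, 5)], [0, 1, 2, 3, 4, 5])

def Spec_subtree_sum (n : Int) (edges : List (Int × Int)) (values : List Int) (out : List Int) : Prop :=
  out = subtree_sum_alt n edges values
instance (n : Int) (edges : List (Int × Int)) (values : List Int) (out : List Int) :
    Decidable (Spec_subtree_sum n edges values out) := by unfold Spec_subtree_sum; infer_instance

-- ===== CLAIM (what is proved, stated in full; the proofs are below) =====
def Claim_equal_subtree_sum : Prop := ∀ (n : Int) (edges : List (Int × Int)) (values : List Int), Dom_subtree_sum n edges values → Pre_subtree_sum n edges values → Spec_subtree_sum n edges values (subtree_sum n edges values)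

-- ===== LEMMAS AND PROOFS =====

-- adjacency list of v as A's and B's dict computes it
def pvAdj (edges : List (Int × Int)) (v : Int) : List Int :=
  edges.flatMap (fun e => (if e.1 = v then [e.2] else []) ++ (if e.2 = v then [e.1] else []))

def pvNbr (edges : List (Int × Int)) (v w : Int) : Prop := (v, w) ∈ edges ∨ (w, v) ∈ edges

def pvIter (edges : List (Int × Int)) (k : Nat) : Finset Int := (pvStep edges)^[k] {1}

noncomputable def pvRank (edges : List (Int × Int)) (v : Int) : Nat :=
  @dite _ (∃ k, v ∈ pvIter edges k) (Classical.propDecidable _)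
    (fun h => Nat.find h) (fun _ => 0)

noncomputable def pvPar (edges : List (Int × Int)) (v : Int) : Int :=
  @dite _ (∃ w, pvNbr edges v w ∧ pvRank edges w < pvRank edges v) (Classical.propDecidable _)
    (fun h => h.choose) (fun _ => -1)

noncomputable def pvParentOf (edges : List (Int × Int)) (v : Int) : Int :=
  if v = 1 then -1 else pvPar edges v

noncomputable def pvChildren (edges : List (Int × Int)) (v : Int) : List Int :=
  (pvAdj edges v).filter (fun w => decide (w ≠ pvParentOf edges v))

def pvChld (edges : List (Int × Int)) (a b : Int) : Prop :=
  b ∈ pvReach edges ∧ b ≠ 1 ∧ pvPar edges b = a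

def pvDesc (edges : List (Int × Int)) : Int → Int → Prop :=
  Relation.ReflTransGen (pvChld edges)

noncomputable def pvSum (edges : List (Int × Int)) (values : List Int) : Nat → Int → Int
  | 0, _ => 0
  | f+1, v => PySem.List.pyGetD values v 0 + ((pvChildren edges v).map (pvSum edges values f)).sum

noncomputable def pvSS (edges : List (Int × Int)) (values : List Int) (v : Int) : Int :=
  pvSum edges values (2 * edges.length + 3 - pvRank edges v) v

noncomputable def pvSz (edges : List (Int × Int)) : Nat → Int → Nat
  | 0, _ => 0
  | f+1, v => 1 + ((pvChildren edges v).map (pvSz edges f)).sum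

noncomputable def pvSZ (edges : List (Int × Int)) (v : Int) : Nat :=
  pvSz edges (2 * edges.length + 3 - pvRank edges v) v

noncomputable def pvOut (n : Int) (edges : List (Int × Int)) (values : List Int) : List Int :=
  (List.range (n + 1).toNat).map
    (fun i : Nat => if (i : Int) ∈ pvReach edges then pvSS edges values (i : Int) else 0)

-- ---- small generic list lemmas ----

theorem pvFilterSumSplit (L : List Int) (f : Int → Int) (q q' : Int → Bool) (a : Int)
    (hnd : L.Nodup) (ha : a ∈ L) (hqa : q a = false) (hq'a : q' a = true)
    (hagree : ∀ x ∈ L, x ≠ a → q x = q' x) :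
    ((L.filter q').map f).sum = ((L.filter q).map f).sum + f a := by
  induction L with
  | nil => simp at ha
  | cons x xs ih =>
    have hnd' := List.nodup_cons.mp hnd
    by_cases hxa : x = a
    · subst hxa
      have hax : x ∉ xs := hnd'.1
      have hxs : xs.filter q = xs.filter q' := by
        apply List.filter_congr
        intro y hy
        exact hagree y (List.mem_cons_of_mem _ hy) (fun he => hax (he ▸ hy))
      rw [List.filter_cons, List.filter_cons, hqa, hq'a]
      simp only [Bool.false_eq_true, if_true, if_false, List.map_cons, List.sum_cons, hxs]
      ring
    · have hx : a ∈ xs := by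
        rcases List.mem_cons.mp ha with h | h
        · exact absurd h.symm hxa
        · exact h
      have hq : q x = q' x := hagree x List.mem_cons_self hxa
      have ihh := ih hnd'.2 hx (fun y hy hne' => hagree y (List.mem_cons_of_mem _ hy) hne')
      rw [List.filter_cons, List.filter_cons, ← hq]
      cases hqx : q x
      · simp only [Bool.false_eq_true, if_false, ihh]
      · simp only [if_true, List.map_cons, List.sum_cons, ihh]
        ring

theorem pvSumLeOne (l : List (Int × Int)) (c : Int × Int → Nat)
    (h1 : ∀ e ∈ l, c e ≤ 1)
    (h2 : l.Pairwise (fun a b => ¬(1 ≤ c a ∧ 1 ≤ c b))) :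
    (l.map c).sum ≤ 1 := by
  induction l with
  | nil => simp
  | cons x xs ih =>
    have hp := List.pairwise_cons.mp h2
    by_cases hx : 1 ≤ c x
    · have : ∀ e ∈ xs, c e = 0 := by
        intro e he
        have := hp.1 e he
        omega
      have hsum : (xs.map c).sum = 0 := by
        apply List.sum_eq_zero; intro y hy
        obtain ⟨e, he, rfl⟩ := List.mem_map.mp hy
        exact this e he
      have := h1 x List.mem_cons_self
      simp [hsum]; omega
    · have := ih (fun e he => h1 e (List.mem_cons_of_mem _ he)) hp.2
      simp; omega

-- ---- closure lemmas ----

theorem pvMemStepAux (edges : List (Int × Int)) (s : Finset Int) :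
    ∀ (l : List (Int × Int)) (t : Finset Int) (x : Int),
      x ∈ l.foldl (fun t e => if e.1 ∈ s ∨ e.2 ∈ s then insert e.1 (insert e.2 t) else t) t ↔
      x ∈ t ∨ ∃ e ∈ l, (e.1 ∈ s ∨ e.2 ∈ s) ∧ (x = e.1 ∨ x = e.2) := by
  intro l
  induction l with
  | nil => simp
  | cons e l ih =>
    intro t x
    simp only [List.foldl_cons, ih]
    by_cases hc : e.1 ∈ s ∨ e.2 ∈ s
    · simp only [if_pos hc, Finset.mem_insert, List.mem_cons]
      constructor
      · rintro ((rfl | rfl | hx) | ⟨e', he', h1, h2⟩)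
        · exact Or.inr ⟨e, Or.inl rfl, hc, Or.inl rfl⟩
        · exact Or.inr ⟨e, Or.inl rfl, hc, Or.inr rfl⟩
        · exact Or.inl hx
        · exact Or.inr ⟨e', Or.inr he', h1, h2⟩
      · rintro (hx | ⟨e', he', h1, h2⟩)
        · exact Or.inl (Or.inr (Or.inr hx))
        · rcases he' with rfl | he''
          · rcases h2 with rfl | rfl
            · exact Or.inl (Or.inl rfl)
            · exact Or.inl (Or.inr (Or.inl rfl))
          · exact Or.inr ⟨e', he'', h1, h2⟩
    · simp only [if_neg hc, List.mem_cons]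
      constructor
      · rintro (hx | ⟨e', he', h1, h2⟩)
        · exact Or.inl hx
        · exact Or.inr ⟨e', Or.inr he', h1, h2⟩
      · rintro (hx | ⟨e', he', h1, h2⟩)
        · exact Or.inl hx
        · rcases he' with rfl | he''
          · exact absurd h1 hc
          · exact Or.inr ⟨e', he'', h1, h2⟩

theorem pvMemStep (edges : List (Int × Int)) (s : Finset Int) (x : Int) :
    x ∈ pvStep edges s ↔ x ∈ s ∨ ∃ e ∈ edges, (e.1 ∈ s ∨ e.2 ∈ s) ∧ (x = e.1 ∨ x = e.2) := by
  exact pvMemStepAux edges s edges s x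

theorem pvSubsetStep (edges : List (Int × Int)) (s : Finset Int) : s ⊆ pvStep edges s := by
  intro x hx; rw [pvMemStep]; exact Or.inl hx

theorem pvIterSucc (edges : List (Int × Int)) (k : Nat) :
    pvIter edges (k + 1) = pvStep edges (pvIter edges k) := by
  unfold pvIter; rw [Function.iterate_succ_apply']

theorem pvIterSubsetSucc (edges : List (Int × Int)) (k : Nat) :
    pvIter edges k ⊆ pvIter edges (k + 1) := by
  rw [pvIterSucc]; exact pvSubsetStep edges _

theorem pvIterMono (edges : List (Int × Int)) (k m : Nat) (hkm : k ≤ m) :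
    pvIter edges k ⊆ pvIter edges m := by
  induction m with
  | zero => have : k = 0 := by omega
            subst this; exact subset_rfl
  | succ m ih =>
    rcases Nat.lt_or_ge k (m+1) with hl | hg
    · exact subset_trans (ih (by omega)) (pvIterSubsetSucc edges m)
    · have : k = m + 1 := by omega
      subst this; exact subset_rfl

def pvVerts (edges : List (Int × Int)) : Finset Int :=
  edges.foldr (fun e t => insert e.1 (insert e.2 t)) {1}

theorem pvMemVerts (edges : List (Int × Int)) (e : Int × Int) (he : e ∈ edges) :
    e.1 ∈ pvVerts edges ∧ e.2 ∈ pvVerts edges := by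
  unfold pvVerts
  induction edges with
  | nil => simp at he
  | cons e' l ih =>
    rcases List.mem_cons.mp he with rfl | he'
    · simp
    · have := ih he'
      simp only [List.foldr_cons, Finset.mem_insert]
      exact ⟨Or.inr (Or.inr this.1), Or.inr (Or.inr this.2)⟩

theorem pvOneMemVerts (edges : List (Int × Int)) : (1 : Int) ∈ pvVerts edges := by
  unfold pvVerts
  induction edges with
  | nil => simp
  | cons e l ih => simp only [List.foldr_cons, Finset.mem_insert]; exact Or.inr (Or.inr ih)

theorem pvCardVertsLe (edges : List (Int × Int)) :
    (pvVerts edges).card ≤ 2 * edges.length + 1 := by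
  unfold pvVerts
  induction edges with
  | nil => simp
  | cons e l ih =>
    simp only [List.foldr_cons, List.length_cons]
    have h1 := Finset.card_insert_le e.1
      (insert e.2 (l.foldr (fun e t => insert e.1 (insert e.2 t)) ({1} : Finset Int)))
    have h2 := Finset.card_insert_le e.2
      (l.foldr (fun e t => insert e.1 (insert e.2 t)) ({1} : Finset Int))
    omega

theorem pvIterSubsetVerts (edges : List (Int × Int)) (k : Nat) :
    pvIter edges k ⊆ pvVerts edges := by
  induction k with
  | zero =>
    intro x hx
    unfold pvIter at hx
    simp only [Function.iterate_zero, id] at hx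
    rw [Finset.mem_singleton] at hx
    subst hx; exact pvOneMemVerts edges
  | succ k ih =>
    intro x hx
    rw [pvIterSucc, pvMemStep] at hx
    rcases hx with hx | ⟨e, he, _, hx⟩
    · exact ih hx
    · rcases hx with rfl | rfl
      · exact (pvMemVerts edges e he).1
      · exact (pvMemVerts edges e he).2

theorem pvIterStabilize (edges : List (Int × Int)) (k m : Nat)
    (hfix : pvIter edges (k + 1) = pvIter edges k) (hkm : k ≤ m) :
    pvIter edges m = pvIter edges k := by
  induction m with
  | zero => have : k = 0 := by omega
            subst this; rfl
  | succ m ih =>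
    rcases Nat.lt_or_ge k (m+1) with hl | hg
    · have hm := ih (by omega)
      rw [pvIterSucc, hm, ← pvIterSucc edges k, hfix]
    · have : k = m + 1 := by omega
      subst this; rfl

theorem pvReachFix (edges : List (Int × Int)) :
    pvStep edges (pvReach edges) = pvReach edges := by
  have hstab : ∃ k ≤ 2 * edges.length + 1, pvIter edges (k + 1) = pvIter edges k := by
    by_contra hcon
    push_neg at hcon
    have hgrow : ∀ k, k ≤ 2 * edges.length + 2 → k + 1 ≤ (pvIter edges k).card := by
      intro k
      induction k with
      | zero =>
        intro _
        unfold pvIter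
        simp
      | succ k ih =>
        intro hk
        have hne := hcon k (by omega)
        have hss : pvIter edges k ⊂ pvIter edges (k + 1) :=
          ssubset_of_subset_of_ne (pvIterSubsetSucc edges k) (Ne.symm hne)
        have := Finset.card_lt_card hss
        have := ih (by omega)
        omega
    have h1 := hgrow (2 * edges.length + 2) (le_refl _)
    have h2 : (pvIter edges (2 * edges.length + 2)).card ≤ (pvVerts edges).card :=
      Finset.card_le_card (pvIterSubsetVerts edges _)
    have h3 := pvCardVertsLe edges
    omega
  obtain ⟨k, hk, hfix⟩ := hstab
  have h1 : pvIter edges (2 * edges.length + 2) = pvIter edges k :=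
    pvIterStabilize edges k _ hfix (by omega)
  have h2 : pvIter edges (2 * edges.length + 3) = pvIter edges k :=
    pvIterStabilize edges k _ hfix (by omega)
  show pvStep edges (pvIter edges (2 * edges.length + 2)) = pvReach edges
  rw [← pvIterSucc]
  show pvIter edges (2 * edges.length + 3) = pvIter edges (2 * edges.length + 2)
  rw [h1, h2]

theorem pvOneMemIterZero (edges : List (Int × Int)) : (1 : Int) ∈ pvIter edges 0 := by
  unfold pvIter; simp

theorem pvOneMemReach (edges : List (Int × Int)) : (1 : Int) ∈ pvReach edges := by
  exact pvIterMono edges 0 _ (by omega) (pvOneMemIterZero edges)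

theorem pvReachClosed (edges : List (Int × Int)) (u w : Int)
    (hn : pvNbr edges u w) (hu : u ∈ pvReach edges) : w ∈ pvReach edges := by
  rw [← pvReachFix edges, pvMemStep]
  rcases hn with he | he
  · exact Or.inr ⟨(u, w), he, Or.inl hu, Or.inr rfl⟩
  · exact Or.inr ⟨(w, u), he, Or.inr hu, Or.inl rfl⟩

theorem pvRankExists (edges : List (Int × Int)) (v : Int) (hv : v ∈ pvReach edges) :
    ∃ k, v ∈ pvIter edges k := ⟨2 * edges.length + 2, hv⟩

theorem pvRankLeOfMem (edges : List (Int × Int)) (v : Int) (k : Nat)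
    (hv : v ∈ pvIter edges k) : pvRank edges v ≤ k := by
  unfold pvRank
  rw [dif_pos ⟨k, hv⟩]
  exact Nat.find_le hv

theorem pvRankLe (edges : List (Int × Int)) (v : Int) (hv : v ∈ pvReach edges) :
    pvRank edges v ≤ 2 * edges.length + 2 :=
  pvRankLeOfMem edges v _ hv

theorem pvMemIterRank (edges : List (Int × Int)) (v : Int) (hv : v ∈ pvReach edges) :
    v ∈ pvIter edges (pvRank edges v) := by
  unfold pvRank
  rw [dif_pos (pvRankExists edges v hv)]
  exact Nat.find_spec (pvRankExists edges v hv)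

theorem pvNotMemIterLt (edges : List (Int × Int)) (v : Int) (j : Nat)
    (hj : j < pvRank edges v) : v ∉ pvIter edges j := by
  by_cases h : ∃ k, v ∈ pvIter edges k
  · unfold pvRank at hj
    rw [dif_pos h] at hj
    exact Nat.find_min h hj
  · unfold pvRank at hj
    rw [dif_neg h] at hj
    omega

theorem pvRankOne (edges : List (Int × Int)) : pvRank edges 1 = 0 := by
  have := pvRankLeOfMem edges 1 0 (pvOneMemIterZero edges)
  omega

theorem pvRankZero (edges : List (Int × Int)) (v : Int) (hv : v ∈ pvReach edges)
    (h0 : pvRank edges v = 0) : v = 1 := by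
  have := pvMemIterRank edges v hv
  rw [h0] at this
  unfold pvIter at this
  simp only [Function.iterate_zero, id, Finset.mem_singleton] at this
  exact this

theorem pvNbrSymm (edges : List (Int × Int)) (v w : Int) :
    pvNbr edges v w ↔ pvNbr edges w v := by
  unfold pvNbr; tauto

theorem pvParSpec (edges : List (Int × Int)) (v : Int) (hv : v ∈ pvReach edges) (hv1 : v ≠ 1) :
    pvNbr edges v (pvPar edges v) ∧ pvRank edges (pvPar edges v) < pvRank edges v := by
  have hm0 : pvRank edges v ≠ 0 := fun h0 => hv1 (pvRankZero edges v hv h0)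
  obtain ⟨m, hm⟩ : ∃ m, pvRank edges v = m + 1 := ⟨pvRank edges v - 1, by omega⟩
  have hvi : v ∈ pvIter edges (m + 1) := hm ▸ pvMemIterRank edges v hv
  have hnv : v ∉ pvIter edges m := pvNotMemIterLt edges v m (by omega)
  rw [pvIterSucc, pvMemStep] at hvi
  have hex : ∃ w, pvNbr edges v w ∧ pvRank edges w < pvRank edges v := by
    rcases hvi with hvi | ⟨e, he, h1, h2⟩
    · exact absurd hvi hnv
    · rcases h1 with h1 | h1 <;> rcases h2 with h2 | h2
      · exact absurd (h2 ▸ h1) hnv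
      · refine ⟨e.1, Or.inr (by rw [h2]; exact he), ?_⟩
        have := pvRankLeOfMem edges e.1 m h1
        omega
      · refine ⟨e.2, Or.inl (by rw [h2]; exact he), ?_⟩
        have := pvRankLeOfMem edges e.2 m h1
        omega
      · exact absurd (h2 ▸ h1) hnv
  have hpar : pvPar edges v = hex.choose := by
    unfold pvPar
    rw [dif_pos hex]
  rw [hpar]
  exact hex.choose_spec

theorem pvParMemReach (edges : List (Int × Int)) (v : Int) (hv : v ∈ pvReach edges)
    (hv1 : v ≠ 1) : pvPar edges v ∈ pvReach edges := by
  have h := pvParSpec edges v hv hv1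
  exact pvReachClosed edges v _ h.1 hv

-- ---- the counting argument: every component edge is a parent edge ----

theorem pvNormSymm (a b : Int) : pvNorm (a, b) = pvNorm (b, a) := by
  unfold pvNorm; dsimp only; split_ifs <;> first | rfl | (exfalso; omega) | (simp; omega)

theorem pvNormEqIff (x y : Int × Int) : pvNorm x = pvNorm y ↔ x = y ∨ x = (y.2, y.1) := by
  obtain ⟨a, b⟩ := x
  obtain ⟨c, d⟩ := y
  unfold pvNorm
  dsimp only
  split_ifs <;> simp [Prod.ext_iff] <;> omega

theorem pvKey (n : Int) (edges : List (Int × Int)) (values : List Int)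
    (h : Pre_subtree_sum n edges values) :
    ∀ e ∈ pvEdgesC edges, ∃ c, c ∈ pvReach edges ∧ c ≠ 1 ∧
      ((e.1 = c ∧ e.2 = pvPar edges c) ∨ (e.2 = c ∧ e.1 = pvPar edges c)) := by
  intro e he
  have hPF : ((pvReach edges).erase 1).image (fun c => pvNorm (c, pvPar edges c)) ⊆
      ((pvEdgesC edges).map pvNorm).toFinset := by
    intro x hx
    obtain ⟨c, hc, rfl⟩ := Finset.mem_image.mp hx
    have hc1 : c ≠ 1 := (Finset.mem_erase.mp hc).1
    have hcC : c ∈ pvReach edges := (Finset.mem_erase.mp hc).2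
    have hnbr := (pvParSpec edges c hcC hc1).1
    rw [List.mem_toFinset, List.mem_map]
    rcases hnbr with he' | he'
    · refine ⟨(c, pvPar edges c), ?_, rfl⟩
      unfold pvEdgesC
      rw [List.mem_filter]
      exact ⟨he', by simp [hcC]⟩
    · refine ⟨(pvPar edges c, c), ?_, ?_⟩
      · unfold pvEdgesC
        rw [List.mem_filter]
        exact ⟨he', by simp [hcC]⟩
      · exact pvNormSymm _ _
  have hinj : Set.InjOn (fun c => pvNorm (c, pvPar edges c)) ↑((pvReach edges).erase 1) := by
    intro c hc d hd hcd
    by_contra hne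
    have hc1 : c ≠ 1 := (Finset.mem_erase.mp hc).1
    have hcC : c ∈ pvReach edges := (Finset.mem_erase.mp hc).2
    have hd1 : d ≠ 1 := (Finset.mem_erase.mp hd).1
    have hdC : d ∈ pvReach edges := (Finset.mem_erase.mp hd).2
    rcases (pvNormEqIff _ _).mp hcd with heq | heq
    · exact hne (congrArg Prod.fst heq)
    · have h1 : c = pvPar edges d := congrArg Prod.fst heq
      have h2 : pvPar edges c = d := congrArg Prod.snd heq
      have hr1 := (pvParSpec edges c hcC hc1).2
      have hr2 := (pvParSpec edges d hdC hd1).2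
      rw [h2] at hr1
      rw [← h1] at hr2
      omega
  have hPcard : (((pvReach edges).erase 1).image (fun c => pvNorm (c, pvPar edges c))).card =
      (pvReach edges).card - 1 := by
    rw [Finset.card_image_of_injOn hinj, Finset.card_erase_of_mem (pvOneMemReach edges)]
  have hFcard : (((pvEdgesC edges).map pvNorm).toFinset).card = (pvReach edges).card - 1 := by
    rw [List.toFinset_card_of_nodup h.2.2.1, List.length_map]
    have := h.2.2.2
    omega
  have heq : ((pvReach edges).erase 1).image (fun c => pvNorm (c, pvPar edges c)) =
      ((pvEdgesC edges).map pvNorm).toFinset := by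
    apply Finset.eq_of_subset_of_card_le hPF
    omega
  have hmem : pvNorm e ∈ ((pvEdgesC edges).map pvNorm).toFinset := by
    rw [List.mem_toFinset, List.mem_map]
    exact ⟨e, he, rfl⟩
  rw [← heq] at hmem
  obtain ⟨c, hc, hnorm⟩ := Finset.mem_image.mp hmem
  refine ⟨c, (Finset.mem_erase.mp hc).2, (Finset.mem_erase.mp hc).1, ?_⟩
  rcases (pvNormEqIff _ _).mp hnorm with heq' | heq'
  · exact Or.inl ⟨(congrArg Prod.fst heq').symm, (congrArg Prod.snd heq').symm⟩
  · exact Or.inr ⟨(congrArg Prod.fst heq').symm, (congrArg Prod.snd heq').symm⟩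

-- ---- adjacency lemmas ----

theorem pvBuildGraph_getD_aux (v : Int) :
    ∀ (l : List (Int × Int)) (d : PySem.Dict Int (List Int)),
      (l.foldl (fun g e => (g.modify e.1 [] (· ++ [e.2])).modify e.2 [] (· ++ [e.1])) d).getD v []
        = d.getD v [] ++ pvAdj l v := by
  intro l
  induction l with
  | nil => intro d; simp [pvAdj]
  | cons e l ih =>
    intro d
    rw [List.foldl_cons, ih]
    have hstep : ((d.modify e.1 [] (· ++ [e.2])).modify e.2 [] (· ++ [e.1])).getD v [] =
        d.getD v [] ++ ((if e.1 = v then [e.2] else []) ++ (if e.2 = v then [e.1] else [])) := by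
      simp only [PySem.Dict.getD_modify]
      have h1' : (v = e.1) ↔ (e.1 = v) := eq_comm
      have h2' : (v = e.2) ↔ (e.2 = v) := eq_comm
      by_cases h1 : e.1 = v <;> by_cases h2 : e.2 = v <;>
        simp [h1', h2', h1, h2, List.append_assoc]
    rw [hstep]
    unfold pvAdj
    rw [List.flatMap_cons, List.append_assoc]

theorem pvBuildGraph_getD (edges : List (Int × Int)) (v : Int) :
    (pvBuildGraph edges).getD v [] = pvAdj edges v := by
  unfold pvBuildGraph
  rw [pvBuildGraph_getD_aux v edges PySem.Dict.empty]
  simp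

theorem pvMemAdj (edges : List (Int × Int)) (v w : Int) :
    w ∈ pvAdj edges v ↔ pvNbr edges v w := by
  unfold pvAdj pvNbr
  rw [List.mem_flatMap]
  constructor
  · rintro ⟨e, he, hw⟩
    rw [List.mem_append] at hw
    rcases hw with hw | hw
    · split_ifs at hw with h1
      · rw [List.mem_singleton] at hw
        subst hw
        left
        have he2 : e = (v, e.2) := by rw [← h1]
        exact he2 ▸ he
      · simp at hw
    · split_ifs at hw with h2
      · rw [List.mem_singleton] at hw
        subst hw
        right
        have he2 : e = (e.1, v) := by rw [← h2]
        exact he2 ▸ he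
      · simp at hw
  · rintro (he | he)
    · exact ⟨(v, w), he, by simp⟩
    · exact ⟨(w, v), he, by by_cases hwv : w = v <;> simp [hwv]⟩

theorem pvCountIf (p : Prop) [inst : Decidable p] (x w : Int) :
    List.count w (if p then [x] else []) = if p ∧ x = w then 1 else 0 := by
  by_cases hp : p
  · rw [if_pos hp]
    by_cases hxw : x = w
    · rw [if_pos ⟨hp, hxw⟩]
      subst hxw
      simp
  
    · rw [if_neg (fun hc => hxw hc.2)]
      simp [List.count_cons, List.count_nil, hxw]
  · rw [if_neg hp, if_neg (fun hc => hp hc.1)]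
    simp

theorem pvAdjNodup (n : Int) (edges : List (Int × Int)) (values : List Int)
    (h : Pre_subtree_sum n edges values) (v : Int) (hv : v ∈ pvReach edges) :
    (pvAdj edges v).Nodup := by
  rw [List.nodup_iff_count_le_one]
  intro w
  unfold pvAdj
  rw [List.count_flatMap]
  set c : Int × Int → Nat :=
    fun e => List.count w ((if e.1 = v then [e.2] else []) ++ (if e.2 = v then [e.1] else []))
    with hcdef
  have hc_eq : ∀ e, c e =
      (if e.1 = v ∧ e.2 = w then 1 else 0) + (if e.2 = v ∧ e.1 = w then 1 else 0) := by
    intro e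
    rw [hcdef]
    dsimp only
    rw [List.count_append, pvCountIf, pvCountIf]
  have hshape : ∀ e, 1 ≤ c e → ((e.1 = v ∧ e.2 = w) ∨ (e.2 = v ∧ e.1 = w)) := by
    intro e hce
    rw [hc_eq] at hce
    by_cases ha : e.1 = v ∧ e.2 = w
    · exact Or.inl ha
    · rw [if_neg ha] at hce
      by_cases hb : e.2 = v ∧ e.1 = w
      · exact Or.inr hb
      · rw [if_neg hb] at hce
        omega
  have hedgesC : ∀ e ∈ edges, 1 ≤ c e → e ∈ pvEdgesC edges := by
    intro e he hce
    unfold pvEdgesC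
    rw [List.mem_filter]
    refine ⟨he, ?_⟩
    rcases hshape e hce with ⟨h1, _⟩ | ⟨h1, _⟩ <;> simp [h1, hv]
  have h1 : ∀ e ∈ edges, c e ≤ 1 := by
    intro e he
    rw [hc_eq]
    by_cases ha : e.1 = v ∧ e.2 = w
    · by_cases hb : e.2 = v ∧ e.1 = w
      · exfalso
        have heC := hedgesC e he (by rw [hc_eq, if_pos ha]; omega)
        have hne := h.2.1 e heC
        exact hne (by rw [ha.1, hb.1])
      · rw [if_pos ha, if_neg hb]
    · rw [if_neg ha]
      split_ifs <;> omega
  have h2 : edges.Pairwise (fun a b => ¬(1 ≤ c a ∧ 1 ≤ c b)) := by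
    have hnd := h.2.2.1
    have hpw1 : ((pvEdgesC edges).map pvNorm).Pairwise (· ≠ ·) := hnd
    have hpw2 : (pvEdgesC edges).Pairwise (fun a b => pvNorm a ≠ pvNorm b) :=
      (List.pairwise_map).mp hpw1
    have hpw3 := List.pairwise_filter.mp hpw2
    apply hpw3.imp_of_mem
    intro a b ha hb himp
    rintro ⟨hca, hcb⟩
    have haC := hedgesC a ha hca
    have hbC := hedgesC b hb hcb
    have hpa : pvNorm a = pvNorm (v, w) := by
      rcases hshape a hca with ⟨u1, u2⟩ | ⟨u1, u2⟩
      · rw [show a = (v, w) from by rw [← u1, ← u2]]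
      · rw [show a = (w, v) from by rw [← u2, ← u1]]
        exact pvNormSymm _ _
    have hpb : pvNorm b = pvNorm (v, w) := by
      rcases hshape b hcb with ⟨u1, u2⟩ | ⟨u1, u2⟩
      · rw [show b = (v, w) from by rw [← u1, ← u2]]
      · rw [show b = (w, v) from by rw [← u2, ← u1]]
        exact pvNormSymm _ _
    have hfa : (fun e => decide (e.1 ∈ pvReach edges ∨ e.2 ∈ pvReach edges)) a = true := by
      unfold pvEdgesC at haC
      exact (List.mem_filter.mp haC).2
    have hfb : (fun e => decide (e.1 ∈ pvReach edges ∨ e.2 ∈ pvReach edges)) b = true := by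
      unfold pvEdgesC at hbC
      exact (List.mem_filter.mp hbC).2
    exact himp hfa hfb (hpa.trans hpb.symm)
  calc (edges.map (List.count w ∘ fun e =>
          (if e.1 = v then [e.2] else []) ++ (if e.2 = v then [e.1] else []))).sum
      = (edges.map c).sum := by rfl
    _ ≤ 1 := pvSumLeOne edges c h1 h2

theorem pvMemChildren (n : Int) (edges : List (Int × Int)) (values : List Int)
    (h : Pre_subtree_sum n edges values) (v : Int) (hv : v ∈ pvReach edges) (w : Int) :
    w ∈ pvChildren edges v ↔ pvChld edges v w := by
  unfold pvChildren
  rw [List.mem_filter]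
  simp only [decide_eq_true_iff]
  constructor
  · rintro ⟨hadj, hnp⟩
    have hnbr := (pvMemAdj edges v w).mp hadj
    have hkey := pvKey n edges values h
    have hmk : ∀ e ∈ edges, (e = (v, w) ∨ e = (w, v)) → pvChld edges v w := by
      intro e he hshape
      have heC : e ∈ pvEdgesC edges := by
        unfold pvEdgesC
        rw [List.mem_filter]
        refine ⟨he, ?_⟩
        rcases hshape with rfl | rfl <;> simp [hv]
      obtain ⟨c, hcC, hc1, hcase⟩ := hkey e heC
      rcases hshape with rfl | rfl
      · rcases hcase with ⟨hc2, hc3⟩ | ⟨hc2, hc3⟩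
        · dsimp at hc2 hc3
          subst hc2
          exfalso
          by_cases hv1 : v = 1
          · exact hc1 hv1
          · apply hnp
            unfold pvParentOf
            rw [if_neg hv1, ← hc3]
        · dsimp at hc2 hc3
          subst hc2
          exact ⟨hcC, hc1, hc3.symm⟩
      · rcases hcase with ⟨hc2, hc3⟩ | ⟨hc2, hc3⟩
        · dsimp at hc2 hc3
          subst hc2
          exact ⟨hcC, hc1, hc3.symm⟩
        · dsimp at hc2 hc3
          subst hc2
          exfalso
          by_cases hv1 : v = 1
          · exact hc1 hv1
          · apply hnp
            unfold pvParentOf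
            rw [if_neg hv1, ← hc3]
    rcases hnbr with he | he
    · exact hmk (v, w) he (Or.inl rfl)
    · exact hmk (w, v) he (Or.inr rfl)
  · rintro ⟨hwC, hw1, hpw⟩
    have hnbrw := (pvParSpec edges w hwC hw1).1
    rw [hpw] at hnbrw
    constructor
    · exact (pvMemAdj edges v w).mpr ((pvNbrSymm edges w v).mp hnbrw)
    · intro hwp
      by_cases hv1 : v = 1
      · unfold pvParentOf at hwp
        rw [if_pos hv1] at hwp
        have := (h.1 w hwC).1
        omega
      · unfold pvParentOf at hwp
        rw [if_neg hv1] at hwp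
        have hvC : v ∈ pvReach edges := by
          rw [← hpw]
          exact pvParMemReach edges w hwC hw1
        have hr1 := (pvParSpec edges w hwC hw1).2
        have hr2 := (pvParSpec edges v hvC hv1).2
        rw [hpw] at hr1
        rw [← hwp] at hr2
        omega

theorem pvChildrenNodup (n : Int) (edges : List (Int × Int)) (values : List Int)
    (h : Pre_subtree_sum n edges values) (v : Int) (hv : v ∈ pvReach edges) :
    (pvChildren edges v).Nodup :=
  (pvAdjNodup n edges values h v hv).filter _

theorem pvChldRank (edges : List (Int × Int)) (a b : Int) (hc : pvChld edges a b) :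
    pvRank edges a < pvRank edges b := by
  obtain ⟨hb, hb1, hp⟩ := hc
  have := (pvParSpec edges b hb hb1).2
  rw [hp] at this; exact this

-- ---- descendant lemmas ----

theorem pvDescMem (edges : List (Int × Int)) (v u : Int) (hd : pvDesc edges v u)
    (hv : v ∈ pvReach edges) : u ∈ pvReach edges := by
  induction hd with
  | refl => exact hv
  | tail _ h _ => exact h.1

theorem pvDescRank (edges : List (Int × Int)) (v u : Int) (hd : pvDesc edges v u) :
    pvRank edges v ≤ pvRank edges u := by
  induction hd with
  | refl => exact le_refl _
  | tail _ h ih => exact le_trans ih (le_of_lt (pvChldRank edges _ _ h))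

theorem pvRootDesc (edges : List (Int × Int)) (u : Int) (hu : u ∈ pvReach edges) :
    pvDesc edges 1 u := by
  generalize hn : pvRank edges u = N
  induction N using Nat.strong_induction_on generalizing u with
  | _ N ih =>
    by_cases h1 : u = 1
    · subst h1; exact Relation.ReflTransGen.refl
    · have hp := pvParSpec edges u hu h1
      have hpm := pvParMemReach edges u hu h1
      have hlt : pvRank edges (pvPar edges u) < N := hn ▸ hp.2
      have hd := ih _ hlt (pvPar edges u) hpm rfl
      exact hd.tail ⟨hu, h1, rfl⟩

theorem pvDescComparable (edges : List (Int × Int)) (a b u : Int)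
    (ha : pvDesc edges a u) (hb : pvDesc edges b u) :
    pvDesc edges a b ∨ pvDesc edges b a := by
  revert ha
  induction hb with
  | refl =>
    intro ha
    exact Or.inl ha
  | @tail m c hbm hstep ih =>
    intro ha
    rcases Relation.ReflTransGen.cases_tail ha with heq | ⟨m', hm', hs'⟩
    · subst heq; exact Or.inr (hbm.tail hstep)
    · have hmm : m' = m := by rw [← hs'.2.2, hstep.2.2]
      exact ih (hmm ▸ hm')

theorem pvDescOfChldDesc (edges : List (Int × Int)) (v c c' : Int) (hne : c ≠ c')
    (hc' : pvChld edges v c') (hcc : pvDesc edges c c') : pvDesc edges c v := by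
  rcases Relation.ReflTransGen.cases_tail hcc with heq | ⟨m, hm, hs⟩
  · exact absurd heq.symm hne
  · have : m = v := by rw [← hs.2.2, hc'.2.2]
    exact this ▸ hm

theorem pvChildSubtreesDisjoint (edges : List (Int × Int)) (v c c' u : Int) (hne : c ≠ c')
    (hc : pvChld edges v c) (hc' : pvChld edges v c')
    (hd : pvDesc edges c u) (hd' : pvDesc edges c' u) : False := by
  rcases pvDescComparable edges c c' u hd hd' with hcc | hcc
  · have hv := pvDescOfChldDesc edges v c c' hne hc' hcc
    have h1 := pvDescRank edges c v hv
    have h2 := pvChldRank edges v c hc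
    omega
  · have hv := pvDescOfChldDesc edges v c' c (Ne.symm hne) hc hcc
    have h1 := pvDescRank edges c' v hv
    have h2 := pvChldRank edges v c' hc'
    omega

theorem pvSelfNotInChildSubtree (edges : List (Int × Int)) (v c u : Int)
    (hc : pvChld edges v c) (hd : pvDesc edges c v) : False := by
  have h1 := pvDescRank edges c v hd
  have h2 := pvChldRank edges v c hc
  omega

theorem pvDescHead (n : Int) (edges : List (Int × Int)) (values : List Int)
    (h : Pre_subtree_sum n edges values) (v u : Int) (hv : v ∈ pvReach edges)
    (hd : pvDesc edges v u) : u = v ∨ ∃ c ∈ pvChildren edges v, pvDesc edges c u := by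
  rcases Relation.ReflTransGen.cases_head hd with heq | ⟨c, hs, hrest⟩
  · exact Or.inl heq.symm
  · exact Or.inr ⟨c, (pvMemChildren n edges values h v hv c).mpr hs, hrest⟩

-- ---- fuel invariance and recurrences ----

theorem pvChldOfMem (n : Int) (edges : List (Int × Int)) (values : List Int)
    (h : Pre_subtree_sum n edges values) (v : Int) (hv : v ∈ pvReach edges) (c : Int)
    (hc : c ∈ pvChildren edges v) :
    c ∈ pvReach edges ∧ pvRank edges v < pvRank edges c ∧ pvRank edges c ≤ 2 * edges.length + 2 := by
  have hch := (pvMemChildren n edges values h v hv c).mp hc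
  exact ⟨hch.1, pvChldRank edges v c hch, pvRankLe edges c hch.1⟩

theorem pvSumFuel (n : Int) (edges : List (Int × Int)) (values : List Int)
    (h : Pre_subtree_sum n edges values) :
    ∀ f v, v ∈ pvReach edges → 2 * edges.length + 3 - pvRank edges v ≤ f →
      pvSum edges values f v = pvSS edges values v := by
  intro f
  induction f using Nat.strong_induction_on with
  | _ f ih =>
    intro v hv hf
    have hrle := pvRankLe edges v hv
    obtain ⟨g, rfl⟩ : ∃ g, f = g + 1 := ⟨f - 1, by omega⟩
    obtain ⟨m, hm⟩ : ∃ m, 2 * edges.length + 3 - pvRank edges v = m + 1 :=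
      ⟨2 * edges.length + 2 - pvRank edges v, by omega⟩
    unfold pvSS
    rw [hm]
    show _ + _ = _ + _
    congr 1
    apply congrArg List.sum
    apply List.map_congr_left
    intro c hc
    obtain ⟨hcC, hcr, hcle⟩ := pvChldOfMem n edges values h v hv c hc
    have h1 : pvSum edges values g c = pvSS edges values c :=
      ih g (by omega) c hcC (by omega)
    have h2 : pvSum edges values m c = pvSS edges values c :=
      ih m (by omega) c hcC (by omega)
    rw [h1, h2]

theorem pvSSRec (n : Int) (edges : List (Int × Int)) (values : List Int)
    (h : Pre_subtree_sum n edges values) (v : Int) (hv : v ∈ pvReach edges) :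
    pvSS edges values v =
      PySem.List.pyGetD values v 0 + ((pvChildren edges v).map (pvSS edges values)).sum := by
  have hrle := pvRankLe edges v hv
  obtain ⟨m, hm⟩ : ∃ m, 2 * edges.length + 3 - pvRank edges v = m + 1 :=
    ⟨2 * edges.length + 2 - pvRank edges v, by omega⟩
  unfold pvSS
  rw [hm]
  show _ + _ = _ + _
  congr 1
  apply congrArg List.sum
  apply List.map_congr_left
  intro c hc
  obtain ⟨hcC, hcr, hcle⟩ := pvChldOfMem n edges values h v hv c hc
  exact pvSumFuel n edges values h m c hcC (by omega)

theorem pvSzFuel (n : Int) (edges : List (Int × Int)) (values : List Int)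
    (h : Pre_subtree_sum n edges values) :
    ∀ f v, v ∈ pvReach edges → 2 * edges.length + 3 - pvRank edges v ≤ f →
      pvSz edges f v = pvSZ edges v := by
  intro f
  induction f using Nat.strong_induction_on with
  | _ f ih =>
    intro v hv hf
    have hrle := pvRankLe edges v hv
    obtain ⟨g, rfl⟩ : ∃ g, f = g + 1 := ⟨f - 1, by omega⟩
    obtain ⟨m, hm⟩ : ∃ m, 2 * edges.length + 3 - pvRank edges v = m + 1 :=
      ⟨2 * edges.length + 2 - pvRank edges v, by omega⟩
    unfold pvSZ
    rw [hm]
    show 1 + _ = 1 + _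
    congr 1
    apply congrArg List.sum
    apply List.map_congr_left
    intro c hc
    obtain ⟨hcC, hcr, hcle⟩ := pvChldOfMem n edges values h v hv c hc
    have h1 : pvSz edges g c = pvSZ edges c := ih g (by omega) c hcC (by omega)
    have h2 : pvSz edges m c = pvSZ edges c := ih m (by omega) c hcC (by omega)
    rw [h1, h2]

theorem pvSZRec (n : Int) (edges : List (Int × Int)) (values : List Int)
    (h : Pre_subtree_sum n edges values) (v : Int) (hv : v ∈ pvReach edges) :
    pvSZ edges v = 1 + ((pvChildren edges v).map (pvSZ edges)).sum := by
  have hrle := pvRankLe edges v hv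
  obtain ⟨m, hm⟩ : ∃ m, 2 * edges.length + 3 - pvRank edges v = m + 1 :=
    ⟨2 * edges.length + 2 - pvRank edges v, by omega⟩
  unfold pvSZ
  rw [hm]
  show 1 + _ = 1 + _
  congr 1
  apply congrArg List.sum
  apply List.map_congr_left
  intro c hc
  obtain ⟨hcC, hcr, hcle⟩ := pvChldOfMem n edges values h v hv c hc
  exact pvSzFuel n edges values h m c hcC (by omega)

noncomputable def pvT (edges : List (Int × Int)) (w : Int) : Finset Int :=
  @Finset.filter _ (pvDesc edges w) (Classical.decPred _) (pvReach edges)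

theorem pvMemT (edges : List (Int × Int)) (w u : Int) :
    u ∈ pvT edges w ↔ u ∈ pvReach edges ∧ pvDesc edges w u := by
  unfold pvT
  exact @Finset.mem_filter _ _ (Classical.decPred _) _ _

theorem pvSZCard (n : Int) (edges : List (Int × Int)) (values : List Int)
    (h : Pre_subtree_sum n edges values) (v : Int) (hv : v ∈ pvReach edges) :
    pvSZ edges v = (pvT edges v).card := by
  have hmeas : ∃ k, 2 * edges.length + 3 - pvRank edges v = k := ⟨_, rfl⟩
  obtain ⟨k, hk⟩ := hmeas
  induction k using Nat.strong_induction_on generalizing v with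
  | _ k ih =>
    have hnd := pvChildrenNodup n edges values h v hv
    have hrle := pvRankLe edges v hv
    have hsplit : pvT edges v =
        insert v ((pvChildren edges v).toFinset.biUnion (pvT edges)) := by
      ext u
      simp only [Finset.mem_insert, Finset.mem_biUnion, List.mem_toFinset, pvMemT]
      constructor
      · rintro ⟨huC, hdu⟩
        rcases pvDescHead n edges values h v u hv hdu with rfl | ⟨c, hc, hcd⟩
        · exact Or.inl rfl
        · exact Or.inr ⟨c, hc, huC, hcd⟩
      · rintro (rfl | ⟨c, hc, huC, hcd⟩)
        · exact ⟨hv, Relation.ReflTransGen.refl⟩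
        · have hch := (pvMemChildren n edges values h v hv c).mp hc
          exact ⟨huC, (Relation.ReflTransGen.single hch).trans hcd⟩
    have hdisj : (↑(pvChildren edges v).toFinset : Set Int).PairwiseDisjoint (pvT edges) := by
      intro c hc c' hc' hne
      simp only [List.coe_toFinset, Set.mem_setOf_eq] at hc hc'
      simp only [Function.onFun]
      rw [Finset.disjoint_left]
      intro u hu hu'
      rw [pvMemT] at hu hu'
      exact pvChildSubtreesDisjoint edges v c c' u hne
        ((pvMemChildren n edges values h v hv c).mp hc)
        ((pvMemChildren n edges values h v hv c').mp hc')
        hu.2 hu'.2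
    have hvnot : v ∉ (pvChildren edges v).toFinset.biUnion (pvT edges) := by
      rw [Finset.mem_biUnion]
      rintro ⟨c, hc, hmem⟩
      rw [List.mem_toFinset] at hc
      rw [pvMemT] at hmem
      exact pvSelfNotInChildSubtree edges v c v
        ((pvMemChildren n edges values h v hv c).mp hc) hmem.2
    rw [hsplit, Finset.card_insert_of_notMem hvnot, Finset.card_biUnion hdisj]
    rw [pvSZRec n edges values h v hv]
    have hsum : ∑ c ∈ (pvChildren edges v).toFinset, (pvT edges c).card =
        ((pvChildren edges v).map (pvSZ edges)).sum := by
      rw [List.sum_toFinset _ hnd]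
      apply congrArg List.sum
      apply List.map_congr_left
      intro c hc
      obtain ⟨hcC, hcr, hcle⟩ := pvChldOfMem n edges values h v hv c hc
      exact (ih (2 * edges.length + 3 - pvRank edges c) (by omega) c hcC rfl).symm
    omega

theorem pvCardReachLe (edges : List (Int × Int)) :
    (pvReach edges).card ≤ 2 * edges.length + 1 := by
  have h1 := Finset.card_le_card (pvIterSubsetVerts edges (2 * edges.length + 2))
  have h2 := pvCardVertsLe edges
  have : pvReach edges = pvIter edges (2 * edges.length + 2) := rfl
  rw [this]
  omega

-- ---- port A = pvOut ----

theorem pvDfsACorrect (n : Int) (edges : List (Int × Int)) (values : List Int)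
    (h : Pre_subtree_sum n edges values) :
    ∀ (f : Nat) (v : Int) (res : List Int), v ∈ pvReach edges →
      2 * edges.length + 3 - pvRank edges v ≤ f → res.length = (n + 1).toNat →
      ∃ res', pvDfsA (pvBuildGraph edges) values f v (pvParentOf edges v) res =
          some (pvSS edges values v, res') ∧ res'.length = res.length ∧
        (∀ i : Nat, (pvDesc edges v (i : Int) → res'[i]? = some (pvSS edges values i)) ∧
          (¬ pvDesc edges v (i : Int) → res'[i]? = res[i]?)) := by
  intro f
  induction f using Nat.strong_induction_on with
  | _ f ihf =>
    intro v res hv hf hlen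
    have hrle := pvRankLe edges v hv
    have hn1 : 1 ≤ n := by
      have := (h.1 1 (pvOneMemReach edges)).2.1
      omega
    obtain ⟨fg, rfl⟩ : ∃ fg, f = fg + 1 := ⟨f - 1, by omega⟩
    obtain ⟨hv0, hvn, hvlen⟩ := h.1 v hv
    -- the neighbour loop
    have hfold : ∀ l : List Int, (∀ w ∈ l, w ∈ pvAdj edges v) → l.Nodup →
        ∀ (acc : Int) (res0 : List Int), res0.length = (n + 1).toNat →
        ∃ res1,
          (l.foldlM (fun (st : Int × List Int) nei =>
            if nei ≠ pvParentOf edges v then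
              (pvDfsA (pvBuildGraph edges) values fg nei v st.2).bind fun r =>
                some (st.1 + r.1, r.2)
            else some st) (acc, res0)) =
            some (acc + ((l.filter (fun w => decide (w ≠ pvParentOf edges v))).map
              (pvSS edges values)).sum, res1) ∧
          res1.length = res0.length ∧
          ∀ i : Nat,
            ((∃ c ∈ l.filter (fun w => decide (w ≠ pvParentOf edges v)),
                pvDesc edges c (i : Int)) → res1[i]? = some (pvSS edges values i)) ∧
            ((¬ ∃ c ∈ l.filter (fun w => decide (w ≠ pvParentOf edges v)),
                pvDesc edges c (i : Int)) → res1[i]? = res0[i]?) := by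
      intro l
      induction l with
      | nil =>
        intro _ _ acc res0 hlen0
        refine ⟨res0, ?_, rfl, ?_⟩
        · simp [List.foldlM_nil]
        · intro i
          constructor
          · rintro ⟨c, hc, _⟩
            simp at hc
          · intro _
            rfl
      | cons w l' ihl =>
        intro hmem hnd acc res0 hlen0
        have hnd' := List.nodup_cons.mp hnd
        rw [List.foldlM_cons]
        by_cases hw : w = pvParentOf edges v
        · -- skipped neighbour (the parent)
          rw [if_neg (by simp [hw])]
          obtain ⟨res1, heq, hlen1, hidx⟩ :=
            ihl (fun x hx => hmem x (List.mem_cons_of_mem _ hx)) hnd'.2 acc res0 hlen0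
          refine ⟨res1, ?_, hlen1, ?_⟩
          · show (l'.foldlM _ (acc, res0)) = _
            rw [heq]
            congr 2
            rw [List.filter_cons, if_neg (by simp [hw])]
          · intro i
            rw [List.filter_cons, if_neg (by simp [hw])]
            exact hidx i
        · -- a child: recurse into it
          have hchld : pvChld edges v w :=
            (pvMemChildren n edges values h v hv w).mp
              (List.mem_filter.mpr ⟨hmem w List.mem_cons_self, by simp [hw]⟩)
          have hwC : w ∈ pvReach edges := hchld.1
          have hwr := pvChldRank edges v w hchld
          have hwparent : pvParentOf edges w = v := by
            unfold pvParentOf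
            rw [if_neg hchld.2.1, hchld.2.2]
          obtain ⟨resw, heqw, hlenw, hidxw⟩ :=
            ihf fg (by omega) w res0 hwC (by omega) hlen0
          rw [hwparent] at heqw
          rw [if_pos (by simp [hw])]
          obtain ⟨res1, heq, hlen1, hidx⟩ :=
            ihl (fun x hx => hmem x (List.mem_cons_of_mem _ hx)) hnd'.2
              (acc + pvSS edges values w) resw (hlenw.trans hlen0)
          refine ⟨res1, ?_, hlen1.trans hlenw, ?_⟩
          · show ((pvDfsA (pvBuildGraph edges) values fg w v res0).bind _ ) >>= _ = _
            rw [heqw]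
            show (l'.foldlM _ (acc + pvSS edges values w, resw)) = _
            rw [heq]
            congr 2
            rw [List.filter_cons, if_pos (by simp [hw])]
            simp only [List.map_cons, List.sum_cons]
            ring
          · intro i
            rw [List.filter_cons, if_pos (by simp [hw])]
            constructor
            · rintro ⟨c, hc, hcd⟩
              rcases List.mem_cons.mp hc with rfl | hc'
              · -- i lies in w's subtree; the later children do not touch it
                have hnotl : ¬ ∃ c ∈ l'.filter (fun x => decide (x ≠ pvParentOf edges v)),
                    pvDesc edges c (i : Int) := by
                  rintro ⟨c', hc', hcd'⟩
                  have hc'mem := List.mem_filter.mp hc'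
                  have hc'chld : pvChld edges v c' :=
                    (pvMemChildren n edges values h v hv c').mp
                      (List.mem_filter.mpr
                        ⟨hmem c' (List.mem_cons_of_mem _ hc'mem.1), hc'mem.2⟩)
                  have hne : c ≠ c' := fun he => hnd'.1 (he ▸ hc'mem.1)
                  exact pvChildSubtreesDisjoint edges v c c' (i : Int) hne hchld hc'chld hcd hcd'
                rw [(hidx i).2 hnotl]
                exact (hidxw i).1 hcd
              · exact (hidx i).1 ⟨c, hc', hcd⟩
            · intro hno
              have hnow : ¬ pvDesc edges w (i : Int) := fun hd =>
                hno ⟨w, List.mem_cons_self, hd⟩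
              have hnol : ¬ ∃ c ∈ l'.filter (fun x => decide (x ≠ pvParentOf edges v)),
                  pvDesc edges c (i : Int) := fun ⟨c, hc, hcd⟩ =>
                hno ⟨c, List.mem_cons_of_mem _ hc, hcd⟩
              rw [(hidx i).2 hnol]
              exact (hidxw i).2 hnow
    -- assemble the step for v
    have hadjeq : (pvBuildGraph edges).getD v [] = pvAdj edges v := pvBuildGraph_getD edges v
    have hvget : PySem.List.pyGet? values v = some (PySem.List.pyGetD values v 0) := by
      rw [PySem.List.pyGet?_eq_some_getElem values hv0 hvlen,
        PySem.List.pyGetD_eq_getElem values 0 hv0 hvlen]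
    obtain ⟨res1, heq, hlen1, hidx⟩ :=
      hfold (pvAdj edges v) (fun w hw => hw) (pvAdjNodup n edges values h v hv)
        (PySem.List.pyGetD values v 0) res hlen
    have htotal : PySem.List.pyGetD values v 0 +
        (((pvAdj edges v).filter (fun w => decide (w ≠ pvParentOf edges v))).map
          (pvSS edges values)).sum = pvSS edges values v := by
      show PySem.List.pyGetD values v 0 +
        ((pvChildren edges v).map (pvSS edges values)).sum = pvSS edges values v
      exact (pvSSRec n edges values h v hv).symm
    have hvnat : ((v.toNat : Int)) = v := Int.toNat_of_nonneg hv0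
    have hvlt : v.toNat < res1.length := by
      rw [hlen1, hlen]
      omega
    have hset : PySem.List.pySet? res1 v (pvSS edges values v) =
        some (res1.set v.toNat (pvSS edges values v)) := by
      rw [← hvnat]
      exact PySem.List.pySet?_natCast res1 v.toNat _ hvlt
    refine ⟨res1.set v.toNat (pvSS edges values v), ?_, by rw [List.length_set, hlen1], ?_⟩
    · rw [pvDfsA, hvget, Option.bind_some, hadjeq, heq, Option.bind_some, htotal, hset,
        Option.bind_some]
    · intro i
      constructor
      · intro hdi
        by_cases hiv : (i : Int) = v
        · have hitov : i = v.toNat := by omega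
          rw [List.getElem?_set, if_pos hitov.symm, if_pos (hitov ▸ hvlt)]
          rw [hiv]
        · rcases pvDescHead n edges values h v (i : Int) hv hdi with heq' | ⟨c, hc, hcd⟩
          · exact absurd heq' hiv
          · have : res1[i]? = some (pvSS edges values i) :=
              (hidx i).1 ⟨c, hc, hcd⟩
            rw [List.getElem?_set, if_neg (by omega), this]
      · intro hdi
        have hiv : ¬ (i : Int) = v := fun he =>
          hdi (he ▸ Relation.ReflTransGen.refl)
        have hno : ¬ ∃ c ∈ (pvAdj edges v).filter (fun w => decide (w ≠ pvParentOf edges v)),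
            pvDesc edges c (i : Int) := by
          rintro ⟨c, hc, hcd⟩
          have hcchld : pvChld edges v c :=
            (pvMemChildren n edges values h v hv c).mp hc
          exact hdi ((Relation.ReflTransGen.single hcchld).trans hcd)
        rw [List.getElem?_set, if_neg (by omega)]
        exact (hidx i).2 hno

theorem pvPortAOut (n : Int) (edges : List (Int × Int)) (values : List Int)
    (h : Pre_subtree_sum n edges values) :
    subtree_sum n edges values = pvOut n edges values := by
  have h1C := pvOneMemReach edges
  have hpar1 : pvParentOf edges 1 = -1 := by
    unfold pvParentOf
    rw [if_pos rfl]
  obtain ⟨res', heq, hlen, hidx⟩ := pvDfsACorrect n edges values h (2 * edges.length + 3) 1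
    (List.replicate (n + 1).toNat (0 : Int)) h1C (by rw [pvRankOne]; omega)
    (by rw [List.length_replicate])
  rw [hpar1] at heq
  show (match pvDfsA (pvBuildGraph edges) values (2 * edges.length + 3) 1 (-1)
      (List.replicate (n + 1).toNat (0 : Int)) with
    | some st => st.2
    | none => []) = pvOut n edges values
  rw [heq]
  show res' = pvOut n edges values
  apply List.ext_getElem?
  intro i
  rw [List.length_replicate] at hlen
  by_cases hi : i < (n + 1).toNat
  · have hout : (pvOut n edges values)[i]? =
        some (if (i : Int) ∈ pvReach edges then pvSS edges values i else 0) := by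
      unfold pvOut
      rw [List.getElem?_map, List.getElem?_range hi]
      rfl
    rw [hout]
    by_cases hmem : (i : Int) ∈ pvReach edges
    · rw [if_pos hmem]
      exact (hidx i).1 (pvRootDesc edges (i : Int) hmem)
    · rw [if_neg hmem]
      have hnd : ¬ pvDesc edges 1 (i : Int) := fun hd =>
        hmem (pvDescMem edges 1 (i : Int) hd h1C)
      rw [(hidx i).2 hnd, List.getElem?_replicate, if_pos hi]
  · have h1 : res'[i]? = none := by
      rw [List.getElem?_eq_none_iff]
      omega
    have h2 : (pvOut n edges values)[i]? = none := by
      rw [List.getElem?_eq_none_iff]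
      unfold pvOut
      rw [List.length_map, List.length_range]
      omega
    rw [h1, h2]

-- ---- port B = pvOut ----

def pvPord (edges : List (Int × Int)) (o : List Int) : Prop :=
  ∀ l1 c l2, o = l1 ++ c :: l2 → c ∈ pvReach edges → c ≠ 1 → pvPar edges c ∈ l1

theorem pvSnocSplit (o : List Int) (v : Int) (l1 : List Int) (c : Int) (l2 : List Int)
    (he : o ++ [v] = l1 ++ c :: l2) :
    (∃ l2', o = l1 ++ c :: l2') ∨ (l1 = o ∧ c = v ∧ l2 = []) := by
  rcases List.eq_nil_or_concat l2 with rfl | ⟨l2'', w, rfl⟩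
  · have h2 : o ++ [v] = l1 ++ [c] := he
    have := List.append_inj' h2 rfl
    exact Or.inr ⟨this.1.symm, (List.singleton_inj.mp this.2).symm, rfl⟩
  · have h2 : o ++ [v] = (l1 ++ c :: l2'') ++ [w] := by
      rw [he]
      simp
    have := List.append_inj' h2 rfl
    exact Or.inl ⟨l2'', this.1⟩

theorem pvLoopB_cons (g : PySem.Dict Int (List Int)) (fu : Nat)
    (stack order parent : List Int) (hne : stack ≠ []) :
    pvLoopB g (fu + 1) stack order parent =
      (PySem.List.pop? stack).bind fun vs =>
      ((g.getD vs.1 []).foldlM (fun (st : List Int × List Int) nei =>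
          (PySem.List.pyGet? st.2 vs.1).bind fun pv =>
          if nei ≠ pv then
            (PySem.List.pySet? st.2 nei vs.1).bind fun par' =>
            some (st.1 ++ [nei], par')
          else some st) (vs.2, parent)).bind fun st =>
      pvLoopB g fu st.1 (order ++ [vs.1]) st.2 := by
  cases stack with
  | nil => exact absurd rfl hne
  | cons a l => rfl

theorem pvLoopBCorrect (n : Int) (edges : List (Int × Int)) (values : List Int)
    (h : Pre_subtree_sum n edges values) :
    ∀ (fuel : Nat) (stack order parent : List Int),
      (∀ s ∈ stack, s ∈ pvReach edges) →
      stack.Pairwise (fun s s' => ∀ u, ¬(pvDesc edges s u ∧ pvDesc edges s' u)) →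
      order.Nodup → (∀ o ∈ order, o ∈ pvReach edges) →
      (∀ o ∈ order, ∀ s ∈ stack, ¬ pvDesc edges s o) →
      (∀ u ∈ pvReach edges, u ∈ order ∨ ∃ s ∈ stack, pvDesc edges s u) →
      parent.length = (n + 1).toNat →
      (∀ u, u ∈ order ∨ u ∈ stack → PySem.List.pyGet? parent u = some (pvParentOf edges u)) →
      pvPord edges order → (∀ s ∈ stack, s ≠ 1 → pvPar edges s ∈ order) →
      (stack.map (pvSZ edges)).sum < fuel →
      ∃ order' parent',
        pvLoopB (pvBuildGraph edges) fuel stack order parent = some (order', parent') ∧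
        order'.Nodup ∧
        (∀ u, u ∈ order' ↔ u ∈ order ∨ ∃ s ∈ stack, pvDesc edges s u) ∧
        pvPord edges order' ∧ parent'.length = (n + 1).toNat ∧
        (∀ u ∈ order', PySem.List.pyGet? parent' u = some (pvParentOf edges u)) := by
  intro fuel
  induction fuel using Nat.strong_induction_on with
  | _ fuel ihf =>
    intro stack order parent hsC hsP hoN hoC hoS hcov hplen hpar hpord hspar hfuel
    rcases List.eq_nil_or_concat stack with rfl | ⟨st₀, v, hst⟩
    · -- empty stack: the loop stops at once, whatever the fuel
      refine ⟨order, parent, ?_, hoN, ?_, hpord, hplen, fun u hu => hpar u (Or.inl hu)⟩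
      · cases fuel <;> rfl
      · intro u
        simp
    · -- pop v from the top of the stack
      rw [List.concat_eq_append] at hst
      subst hst
      have hvS : v ∈ st₀ ++ [v] := by simp
      have hvC : v ∈ pvReach edges := hsC v hvS
      obtain ⟨hv0, hvn, _⟩ := h.1 v hvC
      have hn1 : 1 ≤ n := by
        have := (h.1 1 (pvOneMemReach edges)).2.1
        omega
      obtain ⟨fu, rfl⟩ : ∃ fu, fuel = fu + 1 := by
        refine ⟨fuel - 1, ?_⟩
        have : 1 ≤ (((st₀ ++ [v]).map (pvSZ edges)).sum) + 1 := by omega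
        omega
      rw [pvLoopB_cons _ _ _ _ _ (by simp), PySem.List.pop?_last, Option.bind_some]
      have hgetv : ∀ pc : List Int, pc.length = (n + 1).toNat →
          PySem.List.pyGet? pc v = pc[v.toNat]? := fun pc _ =>
        PySem.List.pyGet?_of_nonneg pc hv0
      -- the neighbour loop: push every child, record v as its parent
      have hfold : ∀ l : List Int, (∀ w ∈ l, w ∈ pvAdj edges v) →
          ∀ (sa pc : List Int), pc.length = (n + 1).toNat →
          PySem.List.pyGet? pc v = some (pvParentOf edges v) →
          ∃ pc', (l.foldlM (fun (st : List Int × List Int) nei =>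
              (PySem.List.pyGet? st.2 v).bind fun pv =>
              if nei ≠ pv then
                (PySem.List.pySet? st.2 nei v).bind fun par' =>
                some (st.1 ++ [nei], par')
              else some st) (sa, pc)) =
            some (sa ++ l.filter (fun w => decide (w ≠ pvParentOf edges v)), pc') ∧
            pc'.length = (n + 1).toNat ∧
            (∀ u : Int, 0 ≤ u →
              PySem.List.pyGet? pc' u =
                if u ∈ l.filter (fun w => decide (w ≠ pvParentOf edges v)) then some v
                else PySem.List.pyGet? pc u) := by
        intro l
        induction l with
        | nil =>
          intro _ sa pc hpclen hpcv
          refine ⟨pc, by simp [List.foldlM_nil], hpclen, ?_⟩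
          intro u _
          simp
        | cons w l' ihl =>
          intro hmem sa pc hpclen hpcv
          rw [List.foldlM_cons, hpcv, Option.bind_some]
          by_cases hw : w = pvParentOf edges v
          · rw [if_neg (by simp [hw])]
            obtain ⟨pc', heq, hlen', hidx'⟩ :=
              ihl (fun x hx => hmem x (List.mem_cons_of_mem _ hx)) sa pc hpclen hpcv
            have hfc : List.filter (fun x => decide (x ≠ pvParentOf edges v)) (w :: l') =
                List.filter (fun x => decide (x ≠ pvParentOf edges v)) l' := by
              rw [List.filter_cons, if_neg (by simp [hw])]
            refine ⟨pc', ?_, hlen', ?_⟩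
            · show (l'.foldlM _ (sa, pc)) = _
              rw [heq, hfc]
            · intro u hu
              rw [hfc]
              exact hidx' u hu
          · have hchld : pvChld edges v w :=
              (pvMemChildren n edges values h v hvC w).mp
                (List.mem_filter.mpr ⟨hmem w List.mem_cons_self, by simp [hw]⟩)
            have hwC : w ∈ pvReach edges := hchld.1
            obtain ⟨hw0, hwn, _⟩ := h.1 w hwC
            have hwv : w ≠ v := by
              intro he
              have := pvChldRank edges v w hchld
              rw [he] at this
              omega
            have hwlt : w.toNat < pc.length := by
              rw [hpclen]
              omega
            have hset : PySem.List.pySet? pc w v = some (pc.set w.toNat v) := by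
              rw [← Int.toNat_of_nonneg hw0]
              exact PySem.List.pySet?_natCast pc w.toNat v hwlt
            rw [if_pos (by simp [hw]), hset, Option.bind_some]
            have hpc1len : (pc.set w.toNat v).length = (n + 1).toNat := by
              rw [List.length_set, hpclen]
            have hpc1v : PySem.List.pyGet? (pc.set w.toNat v) v =
                some (pvParentOf edges v) := by
              rw [PySem.List.pyGet?_of_nonneg _ hv0, List.getElem?_set,
                if_neg (by omega), ← PySem.List.pyGet?_of_nonneg pc hv0]
              exact hpcv
            obtain ⟨pc', heq, hlen', hidx'⟩ :=
              ihl (fun x hx => hmem x (List.mem_cons_of_mem _ hx)) (sa ++ [w])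
                (pc.set w.toNat v) hpc1len hpc1v
            have hfc : List.filter (fun x => decide (x ≠ pvParentOf edges v)) (w :: l') =
                w :: List.filter (fun x => decide (x ≠ pvParentOf edges v)) l' := by
              rw [List.filter_cons, if_pos (by simp [hw])]
            refine ⟨pc', ?_, hlen', ?_⟩
            · show (l'.foldlM _ (sa ++ [w], pc.set w.toNat v)) = _
              rw [heq, hfc]
              simp
            · intro u hu
              rw [hidx' u hu, hfc]
              by_cases hul : u ∈ l'.filter (fun x => decide (x ≠ pvParentOf edges v))
              · rw [if_pos hul, if_pos (List.mem_cons_of_mem _ hul)]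
              · rw [if_neg hul]
                by_cases huw : u = w
                · subst huw
                  rw [if_pos List.mem_cons_self,
                    PySem.List.pyGet?_of_nonneg _ hu, List.getElem?_set,
                    if_pos (by omega), if_pos (by omega)]
                · rw [if_neg (by
                    intro hmem'
                    rcases List.mem_cons.mp hmem' with he | he
                    · exact huw he
                    · exact hul he),
                    PySem.List.pyGet?_of_nonneg _ hu, List.getElem?_set,
                    if_neg (by omega), ← PySem.List.pyGet?_of_nonneg pc hu]
      -- run the loop body for v
      have hadjeq : (pvBuildGraph edges).getD v [] = pvAdj edges v := pvBuildGraph_getD edges v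
      obtain ⟨pc', heqf, hlen', hidx'⟩ :=
        hfold (pvAdj edges v) (fun w hw => hw) st₀ parent hplen (hpar v (Or.inr hvS))
      have hchildeq : (pvAdj edges v).filter (fun w => decide (w ≠ pvParentOf edges v)) =
          pvChildren edges v := rfl
      rw [hadjeq, heqf, Option.bind_some, hchildeq]
      rw [hchildeq] at hidx'
      -- facts about the children
      have hchld : ∀ c ∈ pvChildren edges v, pvChld edges v c := fun c hc =>
        (pvMemChildren n edges values h v hvC c).mp hc
      have hchldC : ∀ c ∈ pvChildren edges v, c ∈ pvReach edges := fun c hc => (hchld c hc).1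
      have hcnd := pvChildrenNodup n edges values h v hvC
      have hpairv : ∀ s ∈ st₀, ∀ u, ¬(pvDesc edges s u ∧ pvDesc edges v u) := by
        have := (List.pairwise_append.mp hsP).2.2
        intro s hs
        exact this s hs v (by simp)
      have hvnotorder : v ∉ order := by
        intro hvo
        exact hoS v hvo v hvS Relation.ReflTransGen.refl
      -- invariants for the recursive call
      have H1 : ∀ s ∈ st₀ ++ pvChildren edges v, s ∈ pvReach edges := by
        intro s hs
        rcases List.mem_append.mp hs with hs | hs
        · exact hsC s (List.mem_append_left _ hs)
        · exact hchldC s hs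
      have H2 : (st₀ ++ pvChildren edges v).Pairwise
          (fun s s' => ∀ u, ¬(pvDesc edges s u ∧ pvDesc edges s' u)) := by
        rw [List.pairwise_append]
        refine ⟨(List.pairwise_append.mp hsP).1, ?_, ?_⟩
        · apply List.Pairwise.imp_of_mem ?_ hcnd
          intro c c' hcm hc'm hne u hu
          exact pvChildSubtreesDisjoint edges v c c' u hne (hchld c hcm) (hchld c' hc'm)
            hu.1 hu.2
        · intro s hs c hc u ⟨hsu, hcu⟩
          exact hpairv s hs u ⟨hsu, (Relation.ReflTransGen.single (hchld c hc)).trans hcu⟩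
      have H3N : (order ++ [v]).Nodup := by
        rw [List.nodup_append]
        refine ⟨hoN, List.nodup_singleton v, ?_⟩
        intro a ha b hb
        rw [List.mem_singleton] at hb
        subst hb
        exact fun he => hvnotorder (he ▸ ha)
      have H3C : ∀ o ∈ order ++ [v], o ∈ pvReach edges := by
        intro o ho
        rcases List.mem_append.mp ho with ho | ho
        · exact hoC o ho
        · rw [List.mem_singleton] at ho
          exact ho ▸ hvC
      have H3S : ∀ o ∈ order ++ [v], ∀ s ∈ st₀ ++ pvChildren edges v, ¬ pvDesc edges s o := by
        intro o ho s hs hd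
        rcases List.mem_append.mp hs with hs | hs
        · rcases List.mem_append.mp ho with ho | ho
          · exact hoS o ho s (List.mem_append_left _ hs) hd
          · rw [List.mem_singleton] at ho
            exact hpairv s hs v ⟨ho ▸ hd, Relation.ReflTransGen.refl⟩
        · rcases List.mem_append.mp ho with ho | ho
          · exact hoS o ho v hvS ((Relation.ReflTransGen.single (hchld s hs)).trans hd)
          · rw [List.mem_singleton] at ho
            exact pvSelfNotInChildSubtree edges v s v (hchld s hs) (ho ▸ hd)
      have H4 : ∀ u ∈ pvReach edges,
          u ∈ order ++ [v] ∨ ∃ s ∈ st₀ ++ pvChildren edges v, pvDesc edges s u := by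
        intro u hu
        rcases hcov u hu with hu' | ⟨s, hs, hsd⟩
        · exact Or.inl (List.mem_append_left _ hu')
        · rcases List.mem_append.mp hs with hs | hs
          · exact Or.inr ⟨s, List.mem_append_left _ hs, hsd⟩
          · rw [List.mem_singleton] at hs
            subst hs
            rcases pvDescHead n edges values h s u (hsC s hvS) hsd with rfl | ⟨c, hc, hcd⟩
            · exact Or.inl (List.mem_append_right _ (by simp))
            · exact Or.inr ⟨c, List.mem_append_right _ hc, hcd⟩
      have H5 : ∀ u, u ∈ order ++ [v] ∨ u ∈ st₀ ++ pvChildren edges v →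
          PySem.List.pyGet? pc' u = some (pvParentOf edges u) := by
        intro u hu
        have hucases : u ∈ pvChildren edges v ∨
            (u ∉ pvChildren edges v ∧ (u ∈ order ∨ u ∈ st₀ ++ [v])) := by
          by_cases huc : u ∈ pvChildren edges v
          · exact Or.inl huc
          · refine Or.inr ⟨huc, ?_⟩
            rcases hu with hu | hu
            · rcases List.mem_append.mp hu with hu | hu
              · exact Or.inl hu
              · exact Or.inr (by rw [List.mem_singleton] at hu; subst hu; exact hvS)
            · rcases List.mem_append.mp hu with hu | hu
              · exact Or.inr (List.mem_append_left _ hu)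
              · exact absurd hu huc
        rcases hucases with huc | ⟨huc, hu'⟩
        · have hch := hchld u huc
          have hu0 : 0 ≤ u := (h.1 u hch.1).1
          rw [hidx' u hu0, if_pos huc]
          unfold pvParentOf
          rw [if_neg hch.2.1, hch.2.2]
        · have huC : u ∈ pvReach edges := by
            rcases hu' with hu' | hu'
            · exact hoC u hu'
            · exact hsC u hu'
          have hu0 : 0 ≤ u := (h.1 u huC).1
          rw [hidx' u hu0, if_neg huc]
          exact hpar u hu'
      have H6 : pvPord edges (order ++ [v]) := by
        intro l1 c l2 he hcC hc1
        rcases pvSnocSplit order v l1 c l2 he with ⟨l2', he'⟩ | ⟨rfl, rfl, rfl⟩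
        · exact hpord l1 c l2' he' hcC hc1
        · exact hspar c hvS hc1
      have H6b : ∀ s ∈ st₀ ++ pvChildren edges v, s ≠ 1 → pvPar edges s ∈ order ++ [v] := by
        intro s hs hs1
        rcases List.mem_append.mp hs with hs | hs
        · exact List.mem_append_left _ (hspar s (List.mem_append_left _ hs) hs1)
        · have := (hchld s hs).2.2
          rw [this]
          exact List.mem_append_right _ (by simp)
      have H7 : ((st₀ ++ pvChildren edges v).map (pvSZ edges)).sum < fu := by
        have hrec := pvSZRec n edges values h v hvC
        have hsum : ((st₀ ++ [v]).map (pvSZ edges)).sum =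
            (st₀.map (pvSZ edges)).sum + pvSZ edges v := by
          simp
        rw [List.map_append, List.sum_append]
        have : (st₀.map (pvSZ edges)).sum + pvSZ edges v < fu + 1 := by
          rw [← hsum]
          exact hfuel
        omega
      obtain ⟨order', parent', heqr, hN', hiff', hpord', hplen'', hpar''⟩ :=
        ihf fu (by omega) (st₀ ++ pvChildren edges v) (order ++ [v]) pc'
          H1 H2 H3N H3C H3S H4 hlen' H5 H6 H6b H7
      refine ⟨order', parent', heqr, hN', ?_, hpord', hplen'', hpar''⟩
      intro u
      rw [hiff' u]
      constructor
      · rintro (hu | ⟨s, hs, hsd⟩)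
        · rcases List.mem_append.mp hu with hu | hu
          · exact Or.inl hu
          · rw [List.mem_singleton] at hu
            subst hu
            exact Or.inr ⟨u, hvS, Relation.ReflTransGen.refl⟩
        · rcases List.mem_append.mp hs with hs | hs
          · exact Or.inr ⟨s, List.mem_append_left _ hs, hsd⟩
          · exact Or.inr ⟨v, hvS, (Relation.ReflTransGen.single (hchld s hs)).trans hsd⟩
      · rintro (hu | ⟨s, hs, hsd⟩)
        · exact Or.inl (List.mem_append_left _ hu)
        · rcases List.mem_append.mp hs with hs | hs
          · exact Or.inr ⟨s, List.mem_append_left _ hs, hsd⟩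
          · rw [List.mem_singleton] at hs
            subst hs
            rcases pvDescHead n edges values h s u (hsC s hvS) hsd with rfl | ⟨c, hc, hcd⟩
            · exact Or.inl (List.mem_append_right _ (by simp))
            · exact Or.inr ⟨c, List.mem_append_right _ hc, hcd⟩

theorem pvSetInt (xs : List Int) (i a : Int) (h0 : 0 ≤ i) (hl : i.toNat < xs.length) :
    PySem.List.pySet? xs i a = some (xs.set i.toNat a) := by
  conv_lhs => rw [← Int.toNat_of_nonneg h0]
  exact PySem.List.pySet?_natCast xs i.toNat a hl

theorem pvPhase2Correct (n : Int) (edges : List (Int × Int)) (values : List Int)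
    (h : Pre_subtree_sum n edges values) (parent : List Int)
    (hplen : parent.length = (n + 1).toNat)
    (hpar : ∀ u ∈ pvReach edges, PySem.List.pyGet? parent u = some (pvParentOf edges u)) :
    ∀ (o : List Int) (res : List Int),
      o.Nodup → (∀ c ∈ o, c ∈ pvReach edges) → pvPord edges o →
      res.length = (n + 1).toNat →
      (∀ i : Nat, i < (n + 1).toNat →
        (((i : Int) ∈ pvReach edges ∧ (i : Int) ∉ o) → res[i]? = some (pvSS edges values i)) ∧
        (((i : Int) ∈ pvReach edges ∧ (i : Int) ∈ o) → res[i]? =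
          some ((((pvChildren edges i).filter (fun c => decide (c ∉ o))).map (pvSS edges values)).sum)) ∧
        (((i : Int) ∉ pvReach edges) → res[i]? = some 0)) →
      ∃ res', pvPhase2 values parent o res = some res' ∧ res'.length = (n + 1).toNat ∧
        (∀ i : Nat, i < (n + 1).toNat → res'[i]? =
          some (if (i : Int) ∈ pvReach edges then pvSS edges values i else 0)) := by
  intro o
  induction o using List.reverseRecOn with
  | nil =>
    intro res _ _ _ hrlen hinv
    refine ⟨res, rfl, hrlen, ?_⟩
    intro i hi
    by_cases hiC : (i : Int) ∈ pvReach edges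
    · rw [if_pos hiC]
      exact (hinv i hi).1 ⟨hiC, by simp⟩
    · rw [if_neg hiC]
      exact (hinv i hi).2.2 hiC
  | append_singleton l v ihl =>
    intro res hnd hoC hpord hrlen hinv
    have hvC : v ∈ pvReach edges := hoC v (by simp)
    obtain ⟨hv0, hvn, hvval⟩ := h.1 v hvC
    have hn1 : 1 ≤ n := by
      have := (h.1 1 (pvOneMemReach edges)).2.1
      omega
    have hvlt : v.toNat < (n + 1).toNat := by omega
    have hndl : l.Nodup := (List.nodup_append.mp hnd).1
    have hvnotl : v ∉ l := by
      intro hvl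
      have := (List.nodup_append.mp hnd).2.2
      exact this v hvl v (by simp) rfl
    -- every child of v lies outside o
    have hchnotin : ∀ c ∈ pvChildren edges v, c ∉ l ++ [v] := by
      intro c hc hco
      have hch := (pvMemChildren n edges values h v hvC c).mp hc
      have hcv : c ≠ v := by
        intro he
        have := pvChldRank edges v c hch
        rw [he] at this
        omega
      rcases List.mem_append.mp hco with hcl | hcl
      · obtain ⟨la, lb, rfl⟩ := List.append_of_mem hcl
        have hsplit : (la ++ c :: lb) ++ [v] = la ++ c :: (lb ++ [v]) := by simp
        have := hpord la c (lb ++ [v]) hsplit hch.1 hch.2.1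
        rw [hch.2.2] at this
        have hdisj := (List.nodup_append.mp hnd).2.2
        exact hdisj v (List.mem_append_left _ this) v (by simp) rfl
      · rw [List.mem_singleton] at hcl
        exact hcv hcl
    have hfilterv : (pvChildren edges v).filter (fun c => decide (c ∉ l ++ [v])) =
        pvChildren edges v := by
      apply List.filter_eq_self.mpr
      intro c hc
      simp only [decide_eq_true_iff]
      exact hchnotin c hc
    -- unfold one step of the backward sweep
    have hstep : (l ++ [v]).reverse = v :: l.reverse := by
      rw [List.reverse_append]
      rfl
    have hcur : res[v.toNat]? =
        some (((pvChildren edges v).map (pvSS edges values)).sum) := by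
      have := (hinv v.toNat hvlt).2.1
      rw [Int.toNat_of_nonneg hv0] at this
      rw [this ⟨hvC, by simp⟩, hfilterv]
    have hget1 : PySem.List.pyGet? res v =
        some (((pvChildren edges v).map (pvSS edges values)).sum) := by
      rw [PySem.List.pyGet?_of_nonneg res hv0]
      exact hcur
    have hget2 : PySem.List.pyGet? values v = some (PySem.List.pyGetD values v 0) := by
      rw [PySem.List.pyGet?_eq_some_getElem values hv0 hvval,
        PySem.List.pyGetD_eq_getElem values 0 hv0 hvval]
    have hSSv : ((pvChildren edges v).map (pvSS edges values)).sum +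
        PySem.List.pyGetD values v 0 = pvSS edges values v := by
      rw [pvSSRec n edges values h v hvC]
      ring
    have hvltres : v.toNat < res.length := by omega
    have hset1 : PySem.List.pySet? res v (((pvChildren edges v).map (pvSS edges values)).sum +
        PySem.List.pyGetD values v 0) = some (res.set v.toNat (pvSS edges values v)) := by
      rw [hSSv]
      exact pvSetInt res v _ hv0 hvltres
    have hres1len : (res.set v.toNat (pvSS edges values v)).length = (n + 1).toNat := by
      rw [List.length_set, hrlen]
    have hget3 : PySem.List.pyGet? (res.set v.toNat (pvSS edges values v)) v =
        some (pvSS edges values v) := by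
      rw [PySem.List.pyGet?_of_nonneg _ hv0, List.getElem?_set, if_pos rfl,
        if_pos hvltres]
    have hget4 : PySem.List.pyGet? parent v = some (pvParentOf edges v) := hpar v hvC
    rw [pvPhase2, hstep, List.foldlM_cons, hget1, Option.bind_some, hget2, Option.bind_some,
      hset1, Option.bind_some, hget3, Option.bind_some, hget4, Option.bind_some]
    by_cases hv1 : v = 1
    · -- the root: no parent update
      have hpof : pvParentOf edges v = -1 := by
        unfold pvParentOf
        rw [if_pos hv1]
      rw [hpof, if_neg (by simp)]
      -- invariant for the remaining prefix
      have hinv' : ∀ i : Nat, i < (n + 1).toNat →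
          (((i : Int) ∈ pvReach edges ∧ (i : Int) ∉ l) →
            (res.set v.toNat (pvSS edges values v))[i]? = some (pvSS edges values i)) ∧
          (((i : Int) ∈ pvReach edges ∧ (i : Int) ∈ l) →
            (res.set v.toNat (pvSS edges values v))[i]? =
            some ((((pvChildren edges i).filter (fun c => decide (c ∉ l))).map
              (pvSS edges values)).sum)) ∧
          (((i : Int) ∉ pvReach edges) →
            (res.set v.toNat (pvSS edges values v))[i]? = some 0) := by
        intro i hi
        refine ⟨?_, ?_, ?_⟩
        · rintro ⟨hiC, hil⟩
          by_cases hiv : i = v.toNat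
          · rw [List.getElem?_set, if_pos hiv.symm, if_pos (hiv ▸ hvltres)]
            subst hiv
            rw [Int.toNat_of_nonneg hv0]
          · rw [List.getElem?_set, if_neg (fun he => hiv he.symm)]
            have hio : (i : Int) ∉ l ++ [v] := by
              intro hio
              rcases List.mem_append.mp hio with hio | hio
              · exact hil hio
              · rw [List.mem_singleton] at hio
                apply hiv
                omega
            exact (hinv i hi).1 ⟨hiC, hio⟩
        · rintro ⟨hiC, hil⟩
          have hiv : ¬ i = v.toNat := by
            intro he
            apply hvnotl
            have : (i : Int) = v := by omega
            rw [← this]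
            exact hil
          rw [List.getElem?_set, if_neg (fun he => hiv he.symm)]
          have heq := (hinv i hi).2.1 ⟨hiC, List.mem_append_left _ hil⟩
          rw [heq]
          have hfeq : List.filter (fun c => decide (c ∉ l ++ [v])) (pvChildren edges (i : Int)) =
              List.filter (fun c => decide (c ∉ l)) (pvChildren edges (i : Int)) := by
            apply List.filter_congr
            intro c hc
            have hch := (pvMemChildren n edges values h (i : Int) hiC c).mp hc
            have hcv : c ≠ v := fun he => hch.2.1 (he.trans hv1)
            rw [decide_eq_decide]
            simp only [List.mem_append, List.mem_singleton]
            constructor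
            · intro hcno hcl
              exact hcno (Or.inl hcl)
            · intro hcnl hco
              rcases hco with hco | hco
              · exact hcnl hco
              · exact hcv hco
          rw [hfeq]
        · intro hiC
          have hiv : ¬ i = v.toNat := by
            intro he
            apply hiC
            have : (i : Int) = v := by omega
            rw [this]
            exact hvC
          rw [List.getElem?_set, if_neg (fun he => hiv he.symm)]
          exact (hinv i hi).2.2 hiC
      exact ihl (res.set v.toNat (pvSS edges values v)) hndl
        (fun c hc => hoC c (List.mem_append_left _ hc))
        (fun l1 c l2 he hcC hc1 => hpord l1 c (l2 ++ [v]) (by rw [he]; simp) hcC hc1)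
        hres1len hinv'
    · -- interior node: add its sum into the parent slot
      have hpof : pvParentOf edges v = pvPar edges v := by
        unfold pvParentOf
        rw [if_neg hv1]
      have hpC : pvPar edges v ∈ pvReach edges := pvParMemReach edges v hvC hv1
      obtain ⟨hp0, hpn, _⟩ := h.1 (pvPar edges v) hpC
      have hpne : pvPar edges v ≠ -1 := by omega
      have hpv : pvPar edges v ≠ v := by
        have := (pvParSpec edges v hvC hv1).2
        intro he
        rw [he] at this
        omega
      have hpmem : pvPar edges v ∈ l := hpord l v [] rfl hvC hv1
      have hplt : (pvPar edges v).toNat < (n + 1).toNat := by omega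
      have hpget : (res.set v.toNat (pvSS edges values v))[(pvPar edges v).toNat]? =
          some ((((pvChildren edges (pvPar edges v)).filter
            (fun c => decide (c ∉ l ++ [v]))).map (pvSS edges values)).sum) := by
        rw [List.getElem?_set, if_neg (by omega)]
        have := (hinv (pvPar edges v).toNat (by omega)).2.1
        rw [Int.toNat_of_nonneg hp0] at this
        exact this ⟨hpC, List.mem_append_left _ hpmem⟩
      have hget5 : PySem.List.pyGet? (res.set v.toNat (pvSS edges values v)) (pvPar edges v) =
          some ((((pvChildren edges (pvPar edges v)).filter
            (fun c => decide (c ∉ l ++ [v]))).map (pvSS edges values)).sum) := by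
        rw [PySem.List.pyGet?_of_nonneg _ hp0]
        exact hpget
      have hpltres : (pvPar edges v).toNat < (res.set v.toNat (pvSS edges values v)).length := by
        rw [hres1len]
        omega
      have hset2 : PySem.List.pySet? (res.set v.toNat (pvSS edges values v)) (pvPar edges v)
          ((((pvChildren edges (pvPar edges v)).filter
            (fun c => decide (c ∉ l ++ [v]))).map (pvSS edges values)).sum + pvSS edges values v) =
          some (((res.set v.toNat (pvSS edges values v)).set (pvPar edges v).toNat
            ((((pvChildren edges (pvPar edges v)).filter
              (fun c => decide (c ∉ l ++ [v]))).map (pvSS edges values)).sum +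
              pvSS edges values v))) := by
        exact pvSetInt _ _ _ hp0 hpltres
      rw [hpof, if_pos (by simp [hpne]), hget5, Option.bind_some, hset2]
      set res2 := ((res.set v.toNat (pvSS edges values v)).set (pvPar edges v).toNat
        ((((pvChildren edges (pvPar edges v)).filter
          (fun c => decide (c ∉ l ++ [v]))).map (pvSS edges values)).sum +
          pvSS edges values v)) with hres2
      have hres2len : res2.length = (n + 1).toNat := by
        rw [hres2, List.length_set, List.length_set, hrlen]
      -- v is a child of its parent
      have hvchild : v ∈ pvChildren edges (pvPar edges v) :=
        (pvMemChildren n edges values h (pvPar edges v) hpC v).mpr ⟨hvC, hv1, rfl⟩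
      have hpsum : (((pvChildren edges (pvPar edges v)).filter
          (fun c => decide (c ∉ l ++ [v]))).map (pvSS edges values)).sum + pvSS edges values v =
          (((pvChildren edges (pvPar edges v)).filter
            (fun c => decide (c ∉ l))).map (pvSS edges values)).sum := by
        rw [pvFilterSumSplit (pvChildren edges (pvPar edges v)) (pvSS edges values)
          (fun c => decide (c ∉ l ++ [v])) (fun c => decide (c ∉ l)) v
          (pvChildrenNodup n edges values h (pvPar edges v) hpC) hvchild
          (by simp) (by simp [hvnotl]) ?_]
        intro x hx hxv
        simp only [decide_eq_true_iff, List.mem_append, List.mem_singleton]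
        by_cases hxl : x ∈ l
        · simp [hxl]
        · simp [hxl, hxv]
      have hinv' : ∀ i : Nat, i < (n + 1).toNat →
          (((i : Int) ∈ pvReach edges ∧ (i : Int) ∉ l) → res2[i]? = some (pvSS edges values i)) ∧
          (((i : Int) ∈ pvReach edges ∧ (i : Int) ∈ l) → res2[i]? =
            some ((((pvChildren edges i).filter (fun c => decide (c ∉ l))).map
              (pvSS edges values)).sum)) ∧
          (((i : Int) ∉ pvReach edges) → res2[i]? = some 0) := by
        intro i hi
        have hresv : res.length = (n + 1).toNat := hrlen
        refine ⟨?_, ?_, ?_⟩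
        · rintro ⟨hiC, hil⟩
          have hip : ¬ i = (pvPar edges v).toNat := by
            intro he
            apply hil
            have : (i : Int) = pvPar edges v := by omega
            rw [this]
            exact hpmem
          rw [hres2, List.getElem?_set, if_neg (fun he => hip he.symm)]
          by_cases hiv : i = v.toNat
          · rw [List.getElem?_set, if_pos hiv.symm, if_pos (hiv ▸ hvltres)]
            subst hiv
            rw [Int.toNat_of_nonneg hv0]
          · rw [List.getElem?_set, if_neg (fun he => hiv he.symm)]
            have hio : (i : Int) ∉ l ++ [v] := by
              intro hio
              rcases List.mem_append.mp hio with hio | hio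
              · exact hil hio
              · rw [List.mem_singleton] at hio
                apply hiv
                omega
            exact (hinv i hi).1 ⟨hiC, hio⟩
        · rintro ⟨hiC, hil⟩
          have hiv : ¬ i = v.toNat := by
            intro he
            apply hvnotl
            have : (i : Int) = v := by omega
            rw [← this]
            exact hil
          by_cases hip : i = (pvPar edges v).toNat
          · rw [hres2, List.getElem?_set, if_pos hip.symm, if_pos (by omega)]
            have hipInt : (i : Int) = pvPar edges v := by omega
            rw [hipInt, hpsum]
          · rw [hres2, List.getElem?_set, if_neg (fun he => hip he.symm),
              List.getElem?_set, if_neg (fun he => hiv he.symm)]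
            have heq := (hinv i hi).2.1 ⟨hiC, List.mem_append_left _ hil⟩
            rw [heq]
            have hfeq : List.filter (fun c => decide (c ∉ l ++ [v])) (pvChildren edges (i : Int)) =
                List.filter (fun c => decide (c ∉ l)) (pvChildren edges (i : Int)) := by
              apply List.filter_congr
              intro c hc
              have hch := (pvMemChildren n edges values h (i : Int) hiC c).mp hc
              have hcv : c ≠ v := by
                intro he
                apply hip
                have : (i : Int) = pvPar edges v := by
                  rw [← hch.2.2, he]
                omega
              rw [decide_eq_decide]
              simp only [List.mem_append, List.mem_singleton]
              constructor
              · intro hcno hcl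
                exact hcno (Or.inl hcl)
              · intro hcnl hco
                rcases hco with hco | hco
                · exact hcnl hco
                · exact hcv hco
            rw [hfeq]
        · intro hiC
          have hiv : ¬ i = v.toNat := by
            intro he
            apply hiC
            have : (i : Int) = v := by omega
            rw [this]
            exact hvC
          have hip : ¬ i = (pvPar edges v).toNat := by
            intro he
            apply hiC
            have : (i : Int) = pvPar edges v := by omega
            rw [this]
            exact hpC
          rw [hres2, List.getElem?_set, if_neg (fun he => hip he.symm),
            List.getElem?_set, if_neg (fun he => hiv he.symm)]
          exact (hinv i hi).2.2 hiC
      exact ihl res2 hndl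
        (fun c hc => hoC c (List.mem_append_left _ hc))
        (fun l1 c l2 he hcC hc1 => hpord l1 c (l2 ++ [v]) (by rw [he]; simp) hcC hc1)
        hres2len hinv'

theorem pvPortBOut (n : Int) (edges : List (Int × Int)) (values : List Int)
    (h : Pre_subtree_sum n edges values) :
    subtree_sum_alt n edges values = pvOut n edges values := by
  have h1C := pvOneMemReach edges
  have hn1 : 1 ≤ n := by
    have := (h.1 1 h1C).2.1
    omega
  have hk2 : 2 ≤ (n + 1).toNat := by omega
  have h1t : (1 : Int).toNat = 1 := rfl
  have hpar1 : pvParentOf edges 1 = -1 := by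
    unfold pvParentOf
    rw [if_pos rfl]
  -- parent = [0]*(n+1); parent[1] = -1
  have hset0 : PySem.List.pySet? (List.replicate (n + 1).toNat (0 : Int)) 1 (-1) =
      some ((List.replicate (n + 1).toNat (0 : Int)).set 1 (-1)) := by
    have := pvSetInt (List.replicate (n + 1).toNat (0 : Int)) 1 (-1) (by omega)
      (by rw [List.length_replicate]; omega)
    rw [h1t] at this
    exact this
  set parent0 := (List.replicate (n + 1).toNat (0 : Int)).set 1 (-1) with hparent0
  have hplen0 : parent0.length = (n + 1).toNat := by
    rw [hparent0, List.length_set, List.length_replicate]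
  have hpar0 : PySem.List.pyGet? parent0 1 = some (-1) := by
    rw [PySem.List.pyGet?_of_nonneg _ (by omega : (0:Int) ≤ 1), h1t, hparent0,
      List.getElem?_set, if_pos rfl, if_pos (by rw [List.length_replicate]; omega)]
  -- the discovery loop
  have hT1 : (pvT edges 1).card ≤ 2 * edges.length + 1 := by
    have hsub : pvT edges 1 ⊆ pvReach edges := by
      intro u hu
      exact ((pvMemT edges 1 u).mp hu).1
    exact le_trans (Finset.card_le_card hsub) (pvCardReachLe edges)
  have hSZ1 : ([(1 : Int)].map (pvSZ edges)).sum < 2 * edges.length + 2 := by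
    have := pvSZCard n edges values h 1 h1C
    simp only [List.map_cons, List.map_nil, List.sum_cons, List.sum_nil, add_zero]
    omega
  obtain ⟨order', parent', heqL, hN', hiff', hpord', hplen', hpar'⟩ :=
    pvLoopBCorrect n edges values h (2 * edges.length + 2) [1] [] parent0
      (by intro s hs; rw [List.mem_singleton] at hs; exact hs ▸ h1C)
      (List.pairwise_singleton _ _)
      List.nodup_nil
      (by intro o ho; simp at ho)
      (by intro o ho; simp at ho)
      (by
        intro u hu
        exact Or.inr ⟨1, List.mem_singleton_self 1, pvRootDesc edges u hu⟩)
      hplen0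
      (by
        intro u hu
        rcases hu with hu | hu
        · simp at hu
        · rw [List.mem_singleton] at hu
          subst hu
          rw [hpar0, hpar1])
      (by
        intro l1 c l2 he _ _
        exact absurd he (by cases l1 <;> simp))
      (by
        intro s hs hs1
        rw [List.mem_singleton] at hs
        exact absurd hs hs1)
      hSZ1
  have hOC : ∀ u, u ∈ order' ↔ u ∈ pvReach edges := by
    intro u
    rw [hiff' u]
    constructor
    · rintro (hu | ⟨s, hs, hsd⟩)
      · simp at hu
      · rw [List.mem_singleton] at hs
        subst hs
        exact pvDescMem edges 1 u hsd h1C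
    · intro hu
      exact Or.inr ⟨1, List.mem_singleton_self 1, pvRootDesc edges u hu⟩
  -- the backward accumulation
  obtain ⟨res', heqP, hrlen', hridx⟩ :=
    pvPhase2Correct n edges values h parent' hplen'
      (fun u hu => hpar' u ((hOC u).mpr hu)) order'
      (List.replicate (n + 1).toNat (0 : Int)) hN'
      (fun c hc => (hOC c).mp hc) hpord'
      (by rw [List.length_replicate])
      (by
        intro i hi
        refine ⟨?_, ?_, ?_⟩
        · rintro ⟨hiC, hio⟩
          exact absurd ((hOC _).mpr hiC) hio
        · rintro ⟨hiC, _⟩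
          rw [List.getElem?_replicate, if_pos hi]
          have hfil : (pvChildren edges (i : Int)).filter (fun c => decide (c ∉ order')) = [] := by
            apply List.filter_eq_nil_iff.mpr
            intro c hc
            simp only [decide_eq_true_iff, Decidable.not_not]
            have hch := (pvMemChildren n edges values h (i : Int) hiC c).mp hc
            exact (hOC c).mpr hch.1
          rw [hfil]
          rfl
        · intro _
          rw [List.getElem?_replicate, if_pos hi])
  -- reduce the match in the port and compare with pvOut
  show (match (PySem.List.pySet? (List.replicate (n + 1).toNat (0 : Int)) 1 (-1)).bind
      (fun parent0 => (pvLoopB (pvBuildGraph edges) (2 * edges.length + 2) [1] [] parent0).bind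
        fun op => pvPhase2 values op.2 op.1 (List.replicate (n + 1).toNat (0 : Int))) with
    | some res => res
    | none => []) = pvOut n edges values
  rw [hset0, Option.bind_some, heqL, Option.bind_some, heqP]
  show res' = pvOut n edges values
  apply List.ext_getElem?
  intro i
  by_cases hi : i < (n + 1).toNat
  · rw [hridx i hi]
    unfold pvOut
    rw [List.getElem?_map, List.getElem?_range hi]
    rfl
  · have h1 : res'[i]? = none := by
      rw [List.getElem?_eq_none_iff]
      omega
    have h2 : (pvOut n edges values)[i]? = none := by
      rw [List.getElem?_eq_none_iff]
      unfold pvOut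
      rw [List.length_map, List.length_range]
      omega
    rw [h1, h2]

-- ===== VERDICT (by name: the statement is the Claim_ definition above) =====
theorem subtree_sum_spec : Claim_equal_subtree_sum := by
  intro n edges values _ hpre
  unfold Spec_subtree_sum
  rw [pvPortAOut n edges values hpre, pvPortBOut n edges values hpre]
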